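-- pv_equiv track=rewrite | github.com/DaMinaup6/algorithm-exercises | hacker_rank/dynamic_programming/medium/kingdom_division.py | kingdomDivision
-- ===== SOURCE A (Python) =====
-- from collections import defaultdict, deque
-- from collections import defaultdict
-- from functools import lru_cache
--
-- def kingdomDivision(n, roads): # roads format: [[1, 2], [1, 3], [3, 4], [3, 5]]
--     edges  = defaultdict(set)
--     degree = defaultdict(int)
--     for road in roads:
--         node_1, node_2 = road
--         edges[node_1].add(node_2)
--         edges[node_2].add(node_1)
--         degree[node_1] += 1
--         degree[node_2] += 1
--
--     @lru_cache(None)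
--     def dfs(node, same_as_parent):
--         if len(edges[node]) == 0:
--             return 1 if same_as_parent else 0
--
--         for child in edges[node]:
--             edges[child].discard(node)
--
--         if same_as_parent:
--             count = 1
--             for child in edges[node]:
--                 count *= dfs(child, False) + dfs(child, True)
--             return count
--         else:
--             count = 1
--             for child in edges[node]:
--                 count *= dfs(child, False)
--             return dfs(node, True) - count
--
--     root = None
--     for node in degree:
--         if degree[node] == 1:
--             root = node
--             break
--
--     return 2 * dfs(root, False) % (10 ** 9 + 7)
-- ===== SOURCE B (Python) =====
-- def kingdomDivision(n, roads):
--     # Single recursive pass returning (f0, f1) pairs per node; no mutation, no memo cache.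
--     adj = {}
--     deg = {}
--     for road in roads:
--         a, b = road
--         adj.setdefault(a, []).append(b)
--         adj.setdefault(b, []).append(a)
--         deg[a] = deg.get(a, 0) + 1
--         deg[b] = deg.get(b, 0) + 1
--     root = next((v for v in deg if deg[v] == 1), None)
--     if root is None:
--         return 0
--
--     def solve(v, p):
--         f0, f1 = 1, 1
--         leaf = True
--         for w in adj[v]:
--             if w != p:
--                 leaf = False
--                 c0, c1 = solve(w, v)
--                 f1 *= c0 + c1
--                 f0 *= c0
--         return (0, 1) if leaf else (f1 - f0, f1)
--
--     return 2 * solve(root, root)[0] % (10 ** 9 + 7)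
-- ===== Notes on version B (the rewrite author's own statement) =====
-- stated objective: simpler
-- what changed: A runs a flag-indexed lru_cache DFS that mutates shared neighbour sets (discarding parents in place) and derives f0 via an extra recursive self-call and subtraction; B is a single plain recursion that passes the parent explicitly and returns the (f0, f1) pair of each subtree at once, with no mutation, no cache and no boolean flag.
-- outside the precondition, e.g. on kingdomDivision(4, [[3, 4], [1, 2], [2, 3], [1, 3]]): A returns 4, B raises RecursionError; on kingdomDivision(4, [[1, 2], [2, 3], [3, 4], [2, 3]]): A returns 4, B returns 8
import Mathlib
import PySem

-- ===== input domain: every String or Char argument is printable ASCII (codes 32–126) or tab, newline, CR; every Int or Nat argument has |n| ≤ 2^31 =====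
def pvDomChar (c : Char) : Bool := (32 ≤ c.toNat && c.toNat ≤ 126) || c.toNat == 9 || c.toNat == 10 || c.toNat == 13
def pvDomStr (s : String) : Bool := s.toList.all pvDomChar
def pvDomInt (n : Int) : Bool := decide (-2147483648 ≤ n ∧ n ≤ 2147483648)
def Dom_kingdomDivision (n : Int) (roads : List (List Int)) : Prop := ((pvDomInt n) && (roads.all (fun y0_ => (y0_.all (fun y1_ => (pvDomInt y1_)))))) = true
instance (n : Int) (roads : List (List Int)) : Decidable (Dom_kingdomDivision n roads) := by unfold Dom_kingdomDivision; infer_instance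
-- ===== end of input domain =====

-- B changes the decomposition only (same asymptotic cost): pair-returning recursion instead of
-- A's mutating, memoized, flag-indexed DFS.  Equivalence is proved on inputs whose root
-- component is a simple tree (see Pre_ below).

-- ===== PORT A =====
-- neutral helper shared by both ports and the precondition: unpack a road 'a, b = road'
-- (a road of length ≠ 2 raises ValueError in Python; both ports are only claimed on pairs)
def pvAsPair (r : List Int) : Option (Int × Int) :=
  match r with
  | a :: rest => match rest with | [b] => some (a, b) | _ => none
  | _ => none

-- dfs(node, same_as_parent): threads the mutated `edges` dict through the recursion.
-- `fuel` is a totality guard only (recursion depth; never exhausted under Pre_).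
-- The lru_cache is value-irrelevant on Pre_ inputs (re-calls see the same pruned sets) and is
-- not modelled.
def dfsA : Nat → PySem.Dict Int (PySem.Set Int) → Int → Bool → Int × PySem.Dict Int (PySem.Set Int)
  | 0, e, _, _ => (0, e)
  | fuel+1, e, node, same =>
    let nbrs : PySem.Set Int := e.getD node PySem.Set.empty
    if nbrs.length = 0 then
      (if same then 1 else 0, e)
    else
      -- for child in edges[node]: edges[child].discard(node)
      let e1 := nbrs.foldl
        (fun ed child => ed.insert child (PySem.Set.discard (ed.getD child PySem.Set.empty) node)) e
      if same then
        nbrs.foldl (fun acc child =>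
          let r0 := dfsA fuel acc.2 child false
          let r1 := dfsA fuel r0.2 child true
          (acc.1 * (r0.1 + r1.1), r1.2)) ((1 : Int), e1)
      else
        let cnt := nbrs.foldl (fun acc child =>
          let r0 := dfsA fuel acc.2 child false
          (acc.1 * r0.1, r0.2)) ((1 : Int), e1)
        let rt := dfsA fuel cnt.2 node true
        (rt.1 - cnt.1, rt.2)

def kingdomDivision (n : Int) (roads : List (List Int)) : Int :=
  let st := roads.foldl
    (fun (st : PySem.Dict Int (PySem.Set Int) × PySem.Dict Int Int) road =>
      match pvAsPair road with
      | some (a, b) =>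
        let e := st.1.insert a (PySem.Set.add (st.1.getD a PySem.Set.empty) b)
        let e := e.insert b (PySem.Set.add (e.getD b PySem.Set.empty) a)
        let d := st.2.insert a (st.2.getD a 0 + 1)
        let d := d.insert b (d.getD b 0 + 1)
        (e, d)
      | none => st)  -- a road that is not a pair raises ValueError in Python (outside Pre_)
    (PySem.Dict.empty, PySem.Dict.empty)
  let root := st.2.keys.find? (fun v => st.2.getD v 0 == 1)
  let dv : Int := match root with
    | some r => (dfsA (2 * roads.length + 4) st.1 r false).1
    | none => 0  -- dfs(None, False) reads edges[None] = set() and returns 0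
  PySem.Int.mod (2 * dv) (10 ^ 9 + 7)

-- ===== PORT B =====
-- solve(v, p): one recursion returning the (f0, f1) pair of the subtree of v (parent p).
-- `fuel` is a totality guard only (recursion depth; never exhausted under Pre_).
def solveB : Nat → PySem.Dict Int (List Int) → Int → Int → Int × Int
  | 0, _, _, _ => (0, 0)
  | fuel+1, adj, v, p =>
    let st := (adj.getD v []).foldl
      (fun (st : Int × Int × Bool) w =>
        if w ≠ p then
          let c := solveB fuel adj w v
          (st.1 * c.1, st.2.1 * (c.1 + c.2), false)
        else st) ((1 : Int), (1 : Int), true)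
    if st.2.2 then (0, 1) else (st.2.1 - st.1, st.2.1)

def kingdomDivision_alt (n : Int) (roads : List (List Int)) : Int :=
  let st := roads.foldl
    (fun (st : PySem.Dict Int (List Int) × PySem.Dict Int Int) road =>
      (pvAsPair road).elim st (fun ab =>
        let ad := st.1.insert ab.1 (st.1.getD ab.1 [] ++ [ab.2])
        let ad := ad.insert ab.2 (ad.getD ab.2 [] ++ [ab.1])
        let d := st.2.insert ab.1 (st.2.getD ab.1 0 + 1)
        let d := d.insert ab.2 (d.getD ab.2 0 + 1)
        (ad, d)))
    (PySem.Dict.empty, PySem.Dict.empty)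
  let root := st.2.keys.find? (fun v => st.2.getD v 0 == 1)
  root.elim 0 (fun r =>
    PySem.Int.mod (2 * (solveB (roads.length + 2) st.1 r r).1) (10 ^ 9 + 7))

-- ===== PRECONDITION & SPEC =====
-- One absorption step: a road with exactly one endpoint already connected to the root is
-- absorbed (the other endpoint joins S); a road with both endpoints in S closes a cycle or
-- duplicates an edge (ok := false); a road touching S not at all stays pending for a later round.
def pvScanStep (st : List Int × List (Int × Int) × List (Int × Int) × Bool) (ab : Int × Int) :
    List Int × List (Int × Int) × List (Int × Int) × Bool :=
  if ab.1 ∈ st.1 then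
    (if ab.2 ∈ st.1 then (st.1, st.2.1 ++ [ab], st.2.2.1, false)
     else (st.1 ++ [ab.2], st.2.1 ++ [ab], st.2.2.1, st.2.2.2))
  else if ab.2 ∈ st.1 then (st.1 ++ [ab.1], st.2.1 ++ [ab], st.2.2.1, st.2.2.2)
  else (st.1, st.2.1, st.2.2.1 ++ [ab], st.2.2.2)

-- Rounds of absorption, so the check accepts roads in ANY order (run to a fixpoint).
def pvScanN : Nat → (List Int × List (Int × Int) × List (Int × Int) × Bool) →
    List Int × List (Int × Int) × List (Int × Int) × Bool
  | 0, st => st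
  | k+1, st => pvScanN k (List.foldl pvScanStep (st.1, st.2.1, [], st.2.2.2) st.2.2.1)

def pvPairs (roads : List (List Int)) : List (Int × Int) :=
  roads.filterMap pvAsPair

def pvRootOf (roads : List (List Int)) : Option Int :=
  let verts := (pvPairs roads).flatMap (fun ab => [ab.1, ab.2])
  (PySem.List.dedup verts).find? (fun v => verts.count v == 1)

def pvScanOK (roads : List (List Int)) : Bool :=
  match pvRootOf roads with
  | none => true
  | some rt =>
    let sc := pvScanN ((pvPairs roads).length + 1) ([rt], [], pvPairs roads, true)
    sc.2.2.2 && sc.2.2.1.all (fun ab => !(ab.1 ∈ sc.1 : Bool) && !(ab.2 ∈ sc.1 : Bool))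

-- Pre_ excludes: roads that are not pairs (A raises ValueError); and inputs whose root component
-- has a cycle, a duplicate road or a self-loop, where A's returned value (when A does not raise
-- RuntimeError) is an artefact of CPython's set-iteration order and of degrees double-counted by
-- duplicates, while B recurses forever on a cycle.  Roads may arrive in any order: the
-- absorption above is iterated to a fixpoint, so every simple tree component is accepted.
def Pre_kingdomDivision (n : Int) (roads : List (List Int)) : Prop :=
  roads.all (fun r => r.length == 2) = true ∧ pvScanOK roads = true

instance (n : Int) (roads : List (List Int)) : Decidable (Pre_kingdomDivision n roads) := by
  unfold Pre_kingdomDivision; infer_instance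

def pvWitness_kingdomDivision : Int × List (List Int) := (5, [[4, 5], [3, 4], [1, 2], [2, 3]])

def Spec_kingdomDivision (n : Int) (roads : List (List Int)) (out : Int) : Prop :=
  out = kingdomDivision_alt n roads
instance (n : Int) (roads : List (List Int)) (out : Int) :
    Decidable (Spec_kingdomDivision n roads out) := by unfold Spec_kingdomDivision; infer_instance

-- ===== CLAIM (what is proved, stated in full; the proofs are below) =====
def Claim_equal_kingdomDivision : Prop := ∀ (n : Int) (roads : List (List Int)),
  Dom_kingdomDivision n roads → Pre_kingdomDivision n roads →
  Spec_kingdomDivision n roads (kingdomDivision n roads)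

-- ===== LEMMAS AND PROOFS =====

set_option maxHeartbeats 1000000

-- rose trees in left-child / right-sibling form: a value of type RT is a FOREST (sibling chain);
-- RT.node l c s = tree with label l and child chain c, followed by sibling chain s
inductive RT where
  | nil : RT
  | node : Int → RT → RT → RT
deriving DecidableEq, Repr

def labsTop : RT → List Int
  | .nil => []
  | .node l _ s => l :: labsTop s

def labels : RT → List Int
  | .nil => []
  | .node l c s => l :: (labels c ++ labels s)

def rtApp : RT → RT → RT
  | .nil, t => t
  | .node l c s, t => .node l c (rtApp s t)

def addLeaf : RT → Int → Int → RT
  | .nil, _, _ => .nil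
  | .node l c s, u, x =>
    if l = u then .node l (rtApp c (.node x .nil .nil)) (addLeaf s u x)
    else .node l (addLeaf c u x) (addLeaf s u x)

-- (P0, P1) of a sibling chain: products over the chain of f0 resp. (f0 + f1) of each tree
def Fp : RT → Int × Int
  | .nil => (1, 1)
  | .node _ c s =>
    ((if c = .nil then 0 else (Fp c).2 - (Fp c).1) * (Fp s).1,
     ((if c = .nil then 0 else (Fp c).2 - (Fp c).1) + (if c = .nil then 1 else (Fp c).2)) * (Fp s).2)

-- f0 / f1 of a single node with child chain c
def v0 (c : RT) : Int := if c = .nil then 0 else (Fp c).2 - (Fp c).1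
def v1 (c : RT) : Int := if c = .nil then 1 else (Fp c).2

lemma Fp_node (l : Int) (c s : RT) :
    Fp (.node l c s) = (v0 c * (Fp s).1, (v0 c + v1 c) * (Fp s).2) := rfl

-- child-label list of the node labelled x inside the forest t
def findC : RT → Int → Option (List Int)
  | .nil, _ => none
  | .node l c s, x => if l = x then some (labsTop c) else ((findC c x).orElse (fun _ => findC s x))

-- t faithfully represents the adjacency adj, all trees of the chain having parent p
def RepT (adj : Int → List Int) : RT → Int → Prop
  | .nil, _ => True
  | .node l c s, p => PySem.Set.discard (adj l) p = labsTop c ∧ RepT adj c l ∧ RepT adj s p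

def adjOf (es : List (Int × Int)) (x : Int) : List Int :=
  es.flatMap (fun ab => (if ab.1 = x then [ab.2] else []) ++ (if ab.2 = x then [ab.1] else []))

lemma adjOf_nil (x : Int) : adjOf [] x = [] := rfl

lemma adjOf_append (es : List (Int × Int)) (ab : Int × Int) (x : Int) :
    adjOf (es ++ [ab]) x =
      adjOf es x ++ ((if ab.1 = x then [ab.2] else []) ++ (if ab.2 = x then [ab.1] else [])) := by
  simp [adjOf]

lemma adjOf_split (l1 l2 : List (Int × Int)) (x : Int) :
    adjOf (l1 ++ l2) x = adjOf l1 x ++ adjOf l2 x := by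
  simp [adjOf]

lemma adjOf_cons (ab : Int × Int) (es : List (Int × Int)) (x : Int) :
    adjOf (ab :: es) x =
      ((if ab.1 = x then [ab.2] else []) ++ (if ab.2 = x then [ab.1] else [])) ++ adjOf es x := by
  simp [adjOf]

lemma discard_eq_filter {l : List Int} {p : Int} :
    PySem.Set.discard l p = l.filter (fun y => !(y == p)) := rfl

lemma discard_of_not_mem {l : List Int} {p : Int} (h : p ∉ l) :
    PySem.Set.discard l p = l := by
  rw [discard_eq_filter]
  apply List.filter_eq_self.2
  intro a ha
  have : a ≠ p := fun he => h (he ▸ ha)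
  simp [this]

lemma mem_labels_of_mem_labsTop {t : RT} {x : Int} (h : x ∈ labsTop t) : x ∈ labels t := by
  induction t with
  | nil => simpa [labsTop] using h
  | node l c s ihc ihs =>
    rcases (by simpa [labsTop] using h : x = l ∨ x ∈ labsTop s) with h1 | h1
    · simp [labels, h1]
    · simp [labels, ihs h1]

lemma labsTop_nodup {t : RT} (h : (labels t).Nodup) : (labsTop t).Nodup := by
  induction t with
  | nil => simp [labsTop]
  | node l c s ihc ihs =>
    simp only [labels, List.nodup_cons, List.nodup_append] at h
    simp only [labsTop, List.nodup_cons]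
    exact ⟨fun hm => h.1 (by simp [mem_labels_of_mem_labsTop hm]), ihs h.2.2.1⟩

lemma findC_eq_none {t : RT} {x : Int} (h : x ∉ labels t) : findC t x = none := by
  induction t with
  | nil => rfl
  | node l c s ihc ihs =>
    have h1 : ¬ l = x := fun hq => h (by simp [labels, hq])
    have h2 : x ∉ labels c := fun hm => h (by simp [labels, hm])
    have h3 : x ∉ labels s := fun hm => h (by simp [labels, hm])
    simp [findC, h1, ihc h2, ihs h3]

lemma findC_isSome_of_mem {t : RT} {x : Int} (h : x ∈ labels t) : (findC t x).isSome := by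
  induction t with
  | nil => simp [labels] at h
  | node l c s ihc ihs =>
    by_cases hlx : l = x
    · simp [findC, hlx]
    · simp only [labels, List.mem_cons, List.mem_append] at h
      rcases h with h | h | h
      · exact absurd h.symm hlx
      · have := ihc h
        simp only [findC, hlx, if_false]
        cases hc : findC c x with
        | none => rw [hc] at this; simp at this
        | some ls => simp [hc]
      · simp only [findC, hlx, if_false]
        cases hc : findC c x with
        | none => simpa [hc] using ihs h
        | some ls => simp [hc]

lemma labsTop_rtApp (c X : RT) : labsTop (rtApp c X) = labsTop c ++ labsTop X := by
  induction c with
  | nil => simp [rtApp, labsTop]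
  | node l cc s ihc ihs => simp [rtApp, labsTop, ihs]

lemma labels_rtApp (c X : RT) : labels (rtApp c X) = labels c ++ labels X := by
  induction c with
  | nil => simp [rtApp, labels]
  | node l cc s ihc ihs => simp [rtApp, labels, ihs]

lemma labsTop_addLeaf (t : RT) (u x : Int) : labsTop (addLeaf t u x) = labsTop t := by
  induction t with
  | nil => rfl
  | node l c s ihc ihs =>
    by_cases hl : l = u <;> simp [addLeaf, hl, labsTop, ihs]

lemma addLeaf_of_not_mem {t : RT} {u x : Int} (h : u ∉ labels t) : addLeaf t u x = t := by
  induction t with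
  | nil => rfl
  | node l c s ihc ihs =>
    have h1 : ¬ l = u := fun hq => h (by simp [labels, hq])
    have h2 : u ∉ labels c := fun hm => h (by simp [labels, hm])
    have h3 : u ∉ labels s := fun hm => h (by simp [labels, hm])
    simp [addLeaf, h1, ihc h2, ihs h3]

lemma labels_addLeaf_perm {t : RT} {u x : Int} (hnd : (labels t).Nodup) (hu : u ∈ labels t) :
    (labels (addLeaf t u x)).Perm (x :: labels t) := by
  induction t with
  | nil => simp [labels] at hu
  | node l c s ihc ihs =>
    rw [show labels (.node l c s) = l :: (labels c ++ labels s) from rfl] at hnd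
    rw [List.nodup_cons, List.nodup_append] at hnd
    obtain ⟨hlm, hnc, hns, hdisj⟩ := hnd
    by_cases hl : l = u
    · have hus : u ∉ labels s := fun hs => hlm (by simp [hl, hs])
      rw [show addLeaf (.node l c s) u x = .node l (rtApp c (.node x .nil .nil)) (addLeaf s u x) by
        simp [addLeaf, hl]]
      rw [addLeaf_of_not_mem hus]
      show (l :: (labels (rtApp c (.node x .nil .nil)) ++ labels s)).Perm _
      rw [labels_rtApp]
      rw [show labels (RT.node x .nil .nil) = [x] from rfl, List.append_assoc]
      show (l :: (labels c ++ ([x] ++ labels s))).Perm (x :: l :: (labels c ++ labels s))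
      refine List.Perm.trans (List.Perm.cons l ?_) (List.Perm.swap x l _)
      exact List.perm_middle
    · have hu' : u ∈ labels c ∨ u ∈ labels s := by
        rcases (by simpa [labels] using hu : u = l ∨ u ∈ labels c ∨ u ∈ labels s) with h | h | h
        · exact absurd h.symm hl
        · exact Or.inl h
        · exact Or.inr h
      rw [show addLeaf (.node l c s) u x = .node l (addLeaf c u x) (addLeaf s u x) by
        simp [addLeaf, hl]]
      rcases hu' with h | h
      · have hus : u ∉ labels s := fun hs => hdisj u h u hs rfl
        rw [addLeaf_of_not_mem hus]
        show (l :: (labels (addLeaf c u x) ++ labels s)).Perm (x :: l :: (labels c ++ labels s))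
        refine List.Perm.trans (List.Perm.cons l (((ihc hnc h)).append_right _)) ?_
        show (l :: ((x :: labels c) ++ labels s)).Perm _
        exact List.Perm.swap x l _
      · have huc : u ∉ labels c := fun hc => hdisj u hc u h rfl
        rw [addLeaf_of_not_mem huc]
        show (l :: (labels c ++ labels (addLeaf s u x))).Perm (x :: l :: (labels c ++ labels s))
        refine List.Perm.trans (List.Perm.cons l ((ihs hns h).append_left _)) ?_
        refine List.Perm.trans (List.Perm.cons l List.perm_middle) (List.Perm.swap x l _)

lemma repT_congr {adj adj' : Int → List Int} : ∀ {t : RT} {p : Int},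
    RepT adj t p → (∀ x ∈ labels t, adj' x = adj x) → RepT adj' t p := by
  intro t
  induction t with
  | nil => intro p _ _; trivial
  | node l c s ihc ihs =>
    intro p h hx
    refine ⟨?_, ihc h.2.1 (fun x hm => hx x (by simp [labels, hm])),
            ihs h.2.2 (fun x hm => hx x (by simp [labels, hm]))⟩
    rw [hx l (by simp [labels])]
    exact h.1

lemma repT_rtApp {adj : Int → List Int} : ∀ {c X : RT} {p : Int},
    RepT adj c p → RepT adj X p → RepT adj (rtApp c X) p := by
  intro c
  induction c with
  | nil => intro X p _ hX; exact hX
  | node l cc s ihc ihs => intro X p hc hX; exact ⟨hc.1, hc.2.1, ihs hc.2.2 hX⟩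

lemma repT_addLeaf {adj adj' : Int → List Int} {u b : Int}
    (hau : adj' u = adj u ++ [b]) (hub : u ≠ b) (hb : adj' b = [u]) :
    ∀ {t : RT} {p : Int},
    RepT adj t p → (labels t).Nodup → b ∉ labels t → b ≠ p →
    (∀ x ∈ labels t, x ≠ u → adj' x = adj x) →
    RepT adj' (addLeaf t u b) p := by
  intro t
  induction t with
  | nil => intro p _ _ _ _ _; trivial
  | node l c s ihc ihs =>
    intro p hrep hnd hbl hbp hne
    rw [show labels (.node l c s) = l :: (labels c ++ labels s) from rfl] at hnd
    rw [List.nodup_cons, List.nodup_append] at hnd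
    obtain ⟨hlm, hnc, hns, hdisj⟩ := hnd
    have hbl' : b ≠ l := fun he => hbl (by simp [labels, he])
    have hblc : b ∉ labels c := fun hm => hbl (by simp [labels, hm])
    have hbls : b ∉ labels s := fun hm => hbl (by simp [labels, hm])
    by_cases hl : l = u
    · rw [show addLeaf (.node l c s) u b = .node l (rtApp c (.node b .nil .nil)) (addLeaf s u b) by
        simp [addLeaf, hl]]
      refine ⟨?_, ?_, ?_⟩
      · subst hl
        rw [hau, discard_eq_filter, List.filter_append, ← discard_eq_filter, ← discard_eq_filter,
            labsTop_rtApp,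
            show PySem.Set.discard [b] p = [b] from discard_of_not_mem (by simp [Ne.symm hbp]),
            hrep.1]
        rfl
      · refine repT_rtApp ?_ ?_
        · refine repT_congr hrep.2.1 (fun x hm => ?_)
          have hxu : x ≠ u := fun he => hlm (by simp [hl, ← he, hm])
          exact hne x (by simp [labels, hm]) hxu
        · refine ⟨?_, trivial, trivial⟩
          rw [hb, ← hl]
          show PySem.Set.discard [l] l = labsTop .nil
          simp [discard_eq_filter, labsTop]
      · exact ihs hrep.2.2 hns hbls hbp (fun x hm hxu => hne x (by simp [labels, hm]) hxu)
    · rw [show addLeaf (.node l c s) u b = .node l (addLeaf c u b) (addLeaf s u b) by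
        simp [addLeaf, hl]]
      refine ⟨?_, ?_, ?_⟩
      · rw [hne l (by simp [labels]) hl, labsTop_addLeaf]
        exact hrep.1
      · exact ihc hrep.2.1 hnc hblc hbl'
          (fun x hm hxu => hne x (by simp [labels, hm]) hxu)
      · exact ihs hrep.2.2 hns hbls hbp (fun x hm hxu => hne x (by simp [labels, hm]) hxu)

lemma repT_newroot {adj adj' : Int → List Int} {ca : RT} {a b : Int}
    (hrep : RepT adj (.node a ca .nil) a) (hnd : (labels (RT.node a ca .nil)).Nodup)
    (hsub : ∀ w ∈ adj a, w ≠ b) (haa : a ∉ adj a)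
    (hne : ∀ x ∈ labels ca, adj' x = adj x)
    (hau : adj' a = adj a ++ [b]) (hb : adj' b = [a]) (hab : a ≠ b) :
    RepT adj' (.node b (.node a ca .nil) .nil) b := by
  have hadj : adj a = labsTop ca := by
    have := hrep.1
    rwa [discard_of_not_mem haa] at this
  refine ⟨?_, ⟨?_, ?_, trivial⟩, trivial⟩
  · rw [hb]
    show PySem.Set.discard [a] b = labsTop (RT.node a ca .nil)
    rw [discard_of_not_mem (by simp [Ne.symm hab])]
    rfl
  · rw [hau, discard_eq_filter, List.filter_append]
    have h1 : (adj a).filter (fun y => !(y == b)) = adj a := by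
      apply List.filter_eq_self.2; intro y hy; simp [hsub y hy]
    have h2 : [b].filter (fun y => !(y == b)) = ([] : List Int) := by simp
    rw [h1, h2, List.append_nil, hadj]
  · refine repT_congr hrep.2.1 hne

def ScanInv (S : List Int) (abs : List (Int × Int)) : Prop :=
  S.Nodup ∧ S.length = abs.length + 1 ∧
  (∀ x, x ∉ S → adjOf abs x = []) ∧
  (∀ x, (adjOf abs x).Nodup) ∧ (∀ x, x ∉ adjOf abs x) ∧ (∀ x w, w ∈ adjOf abs x → w ∈ S) ∧
  (∀ r ∈ S, ∃ c, RepT (adjOf abs) (.node r c .nil) r ∧ (labels (.node r c .nil)).Perm S)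

lemma addLeaf_node_shape (r : Int) (c : RT) (u w : Int) :
    ∃ c', addLeaf (.node r c .nil) u w = .node r c' .nil := by
  by_cases hr : r = u
  · exact ⟨rtApp c (.node w .nil .nil), by simp [addLeaf, hr]⟩
  · exact ⟨addLeaf c u w, by simp [addLeaf, hr]⟩

lemma scanInv_step {S : List Int} {abs : List (Int × Int)} {u w : Int} {pr : Int × Int}
    (hInv : ScanInv S abs) (hu : u ∈ S) (hw : w ∉ S)
    (hpr : pr = (u, w) ∨ pr = (w, u)) :
    ScanInv (S ++ [w]) (abs ++ [pr]) := by
  obtain ⟨hnd, hlen, hout, hadjnd, hself, hsubS, htrees⟩ := hInv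
  have huw : u ≠ w := fun he => hw (he ▸ hu)
  have hadjN : ∀ x, adjOf (abs ++ [pr]) x =
      adjOf abs x ++ (if x = u then [w] else if x = w then [u] else []) := by
    intro x
    rcases hpr with h | h <;> subst h <;> rw [adjOf_append] <;>
      by_cases hxu : x = u <;> by_cases hxw : x = w <;>
      simp_all [eq_comm] <;> try (exact absurd (hxu ▸ hxw) huw)
  refine ⟨?_, ?_, ?_, ?_, ?_, ?_, ?_⟩
  · simp [List.nodup_append, hnd, fun (h : w ∈ S) => hw h]
    intro a ha he; exact hw (he ▸ ha)
  · simp [hlen]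
  · intro x hx
    have hx1 : x ∉ S := fun h => hx (by simp [h])
    have hx2 : x ≠ w := fun h => hx (by simp [h])
    have hx3 : x ≠ u := fun h => hx1 (h ▸ hu)
    rw [hadjN, hout x hx1]
    simp [hx2, hx3]
  · intro x
    rw [hadjN]
    by_cases hxu : x = u
    · subst hxu
      simp only [if_pos rfl]
      rw [List.nodup_append]
      exact ⟨hadjnd x, List.nodup_singleton w, by
        intro a ha bb hbb he; subst he; simp at hbb; exact hw (hbb ▸ hsubS x a ha)⟩
    · by_cases hxw : x = w
      · subst hxw
        rw [hout x hw]
        simp [hxu]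
      · simp [hxu, hxw, hadjnd x]
  · intro x
    rw [hadjN]
    by_cases hxu : x = u
    · subst hxu; simp only [if_pos rfl, List.mem_append]
      rintro (h | h)
      · exact hself x h
      · simp at h; exact hw (h ▸ hu)
    · by_cases hxw : x = w
      · subst hxw; rw [hout x hw]; simp [hxu]
      · simp [hxu, hxw, hself x]
  · intro x y
    rw [hadjN]
    by_cases hxu : x = u
    · subst hxu; simp only [if_pos rfl, List.mem_append]
      rintro (h | h)
      · simp [hsubS x y h]
      · simp at h; simp [h]
    · by_cases hxw : x = w
      · subst hxw; rw [hout x hw]; simp [hxu]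
        intro h; simp [h, hu]
      · simp only [hxu, if_false, hxw, List.append_nil]
        intro h; simp [hsubS x y h]
  · intro r hr
    rw [List.mem_append] at hr
    rcases hr with hr | hr
    · obtain ⟨c, hrep, hperm⟩ := htrees r hr
      have hndl : (labels (RT.node r c .nil)).Nodup := hperm.nodup_iff.2 hnd
      have hul : u ∈ labels (RT.node r c .nil) := hperm.mem_iff.2 hu
      have hwl : w ∉ labels (RT.node r c .nil) := fun h => hw (hperm.mem_iff.1 h)
      obtain ⟨c', hc'⟩ := addLeaf_node_shape r c u w
      refine ⟨c', ?_, ?_⟩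
      · rw [← hc']
        refine repT_addLeaf (by rw [hadjN]; simp) huw
          (by rw [hadjN, hout w hw]; simp [Ne.symm huw]) hrep hndl hwl
          (fun he => hw (he ▸ hr)) (fun x hm hxu => ?_)
        have hxS : x ∈ S := hperm.mem_iff.1 hm
        have hxw : x ≠ w := fun he => hw (he ▸ hxS)
        rw [hadjN]; simp [hxu, hxw]
      · rw [← hc']
        refine ((labels_addLeaf_perm hndl hul).trans (hperm.cons w)).trans
          (List.perm_append_singleton w S).symm
    · simp at hr
      subst hr
      obtain ⟨cu, hrepu, hpermu⟩ := htrees u hu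
      have hndu : (labels (RT.node u cu .nil)).Nodup := hpermu.nodup_iff.2 hnd
      refine ⟨.node u cu .nil, ?_, ?_⟩
      · refine repT_newroot hrepu hndu (fun y hy he => hw (he ▸ hsubS u y hy)) (hself u)
          (fun x hm => ?_) (by rw [hadjN]; simp) (by rw [hadjN, hout r hw]; simp [Ne.symm huw]) huw
        have hxS : x ∈ S := hpermu.mem_iff.1 (by simp [labels, hm])
        have hxw : x ≠ r := fun he => hw (he ▸ hxS)
        have hxu : x ≠ u := by
          have := hndu
          rw [show labels (.node u cu .nil) = u :: (labels cu ++ []) from rfl, List.append_nil,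
            List.nodup_cons] at this
          exact fun he => this.1 (he ▸ hm)
        rw [hadjN]; simp [hxu, hxw]
      · show (r :: (labels (RT.node u cu .nil) ++ [])).Perm (S ++ [r])
        rw [List.append_nil]
        exact (hpermu.cons r).trans (List.perm_append_singleton r S).symm

abbrev EDict := PySem.Dict Int (PySem.Set Int)

-- invariant on the A-side edge dict: entries of a pending sibling chain (parent v not yet
-- discarded from them, or already harmlessly absent)
def InvL (e : EDict) : RT → Int → Prop
  | .nil, _ => True
  | .node c g s, v =>
      PySem.Set.discard (e.getD c PySem.Set.empty) v = labsTop g ∧ InvL e g c ∧ InvL e s v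

-- entries of a sibling chain ready to be recursed into (parent already discarded)
def CallL (e : EDict) : RT → Int → Prop
  | .nil, _ => True
  | .node c g s, v => e.getD c PySem.Set.empty = labsTop g ∧ InvL e g c ∧ CallL e s v

-- e' is e with every node of t finalised to its child-label list
def SSC (e e' : EDict) (t : RT) : Prop :=
  ∀ x : Int, e'.getD x PySem.Set.empty = (findC t x).getD (e.getD x PySem.Set.empty)

lemma mem_of_findC_some {t : RT} {x : Int} {ls : List Int} (h : findC t x = some ls) :
    x ∈ labels t := by
  by_contra hm
  rw [findC_eq_none hm] at h
  cases h

lemma invL_congr {e e' : EDict} : ∀ {t : RT} {v : Int},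
    InvL e t v → (∀ x ∈ labels t, e'.getD x PySem.Set.empty = e.getD x PySem.Set.empty) →
    InvL e' t v := by
  intro t
  induction t with
  | nil => intro v _ _; trivial
  | node c g s ihc ihs =>
    intro v h hx
    exact ⟨by rw [hx c (by simp [labels])]; exact h.1,
      ihc h.2.1 (fun x hm => hx x (by simp [labels, hm])),
      ihs h.2.2 (fun x hm => hx x (by simp [labels, hm]))⟩

lemma callL_congr {e e' : EDict} : ∀ {t : RT} {v : Int},
    CallL e t v → (∀ x ∈ labels t, e'.getD x PySem.Set.empty = e.getD x PySem.Set.empty) →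
    CallL e' t v := by
  intro t
  induction t with
  | nil => intro v _ _; trivial
  | node c g s ihc ihs =>
    intro v h hx
    exact ⟨by rw [hx c (by simp [labels])]; exact h.1,
      invL_congr h.2.1 (fun x hm => hx x (by simp [labels, hm])),
      ihs h.2.2 (fun x hm => hx x (by simp [labels, hm]))⟩

lemma callL_to_invL : ∀ {t : RT} {v : Int} {e : EDict},
    CallL e t v → v ∉ labels t → InvL e t v := by
  intro t
  induction t with
  | nil => intro v e _ _; trivial
  | node c g s ihc ihs =>
    intro v e h hv
    refine ⟨?_, h.2.1, ihs h.2.2 (fun hm => hv (by simp [labels, hm]))⟩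
    rw [h.1]
    exact discard_of_not_mem
      (fun hm => hv (by simp [labels, mem_labels_of_mem_labsTop hm]))

lemma finCallL : ∀ {t : RT} {v : Int} {e' : EDict},
    (labels t).Nodup → v ∉ labels t →
    (∀ x ∈ labels t, e'.getD x PySem.Set.empty = (findC t x).getD []) →
    CallL e' t v := by
  intro t
  induction t with
  | nil => intro v e' _ _ _; trivial
  | node c g s ihc ihs =>
    intro v e' hnd hv hpt
    rw [show labels (.node c g s) = c :: (labels g ++ labels s) from rfl] at hnd
    rw [List.nodup_cons, List.nodup_append] at hnd
    obtain ⟨hcm, hng, hns, hdisj⟩ := hnd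
    have hcg : c ∉ labels g := fun hm => hcm (by simp [hm])
    refine ⟨?_, ?_, ?_⟩
    · have := hpt c (by simp [labels])
      rwa [show findC (.node c g s) c = some (labsTop g) by simp [findC]] at this
    · refine callL_to_invL (ihc hng hcg (fun x hm => ?_)) hcg
      have hx := hpt x (by simp [labels, hm])
      have hxc : ¬ c = x := fun he => hcg (he ▸ hm)
      rw [show findC (.node c g s) x = (findC g x).orElse (fun _ => findC s x) by
        simp [findC, hxc]] at hx
      obtain ⟨ls, hls⟩ := Option.isSome_iff_exists.1 (findC_isSome_of_mem hm)
      rw [hls] at hx ⊢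
      simpa using hx
    · refine ihs hns (fun hm => hv (by simp [labels, hm])) (fun x hm => ?_)
      have hx := hpt x (by simp [labels, hm])
      have hxc : ¬ c = x := fun he => hcm (by simp [he, hm])
      have hxg : x ∉ labels g := fun hmg => hdisj x hmg x hm rfl
      rw [show findC (.node c g s) x = (findC g x).orElse (fun _ => findC s x) by
        simp [findC, hxc], findC_eq_none hxg] at hx
      simpa using hx

lemma ssc_trans {e e1 e2 : EDict} {t : RT} (h1 : SSC e e1 t) (h2 : SSC e1 e2 t) : SSC e e2 t := by
  intro x
  rw [h2 x]
  cases hf : findC t x with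
  | none => rw [h1 x, hf]; rfl
  | some ls => rfl

lemma ssc_head_chain {c0 : Int} {g s : RT} {e e1 e2 : EDict}
    (hnd : (labels (RT.node c0 g s)).Nodup)
    (h1 : SSC e e1 (.node c0 g .nil)) (h2 : SSC e1 e2 s) : SSC e e2 (.node c0 g s) := by
  rw [show labels (.node c0 g s) = c0 :: (labels g ++ labels s) from rfl] at hnd
  rw [List.nodup_cons, List.nodup_append] at hnd
  obtain ⟨hcm, hng, hns, hdisj⟩ := hnd
  intro x
  rw [h2 x]
  cases hf : findC s x with
  | some ls =>
    have hxs : x ∈ labels s := mem_of_findC_some hf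
    have hxc : ¬ c0 = x := fun he => hcm (by simp [he, hxs])
    have hxg : x ∉ labels g := fun hmg => hdisj x hmg x hxs rfl
    rw [show findC (.node c0 g s) x = (findC g x).orElse (fun _ => findC s x) by
      simp [findC, hxc], findC_eq_none hxg, hf]
    rfl
  | none =>
    rw [h1 x]
    by_cases hxc : c0 = x
    · rw [show findC (.node c0 g s) x = some (labsTop g) by simp [findC, hxc],
        show findC (.node c0 g .nil) x = some (labsTop g) by simp [findC, hxc]]
      rfl
    · rw [show findC (.node c0 g s) x = (findC g x).orElse (fun _ => findC s x) by
        simp [findC, hxc],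
        show findC (.node c0 g .nil) x = (findC g x).orElse (fun _ => findC .nil x) by
        simp [findC, hxc], hf]
      cases hg : findC g x <;> rfl

-- both fold loops inside dfsA compute the chain products and finalise the chain's entries
def ChainOK (cs : RT) : Prop :=
  ∀ (v : Int) (e : EDict) (fuel : Nat) (a : Int),
    (labels cs).Nodup → v ∉ labels cs → CallL e cs v → 2 * (labels cs).length ≤ fuel →
    (∃ e', (labsTop cs).foldl (fun acc child =>
        let r0 := dfsA fuel acc.2 child false
        (acc.1 * r0.1, r0.2)) (a, e) = (a * (Fp cs).1, e') ∧ SSC e e' cs) ∧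
    (∃ e', (labsTop cs).foldl (fun acc child =>
        let r0 := dfsA fuel acc.2 child false
        let r1 := dfsA fuel r0.2 child true
        (acc.1 * (r0.1 + r1.1), r1.2)) (a, e) = (a * (Fp cs).2, e') ∧ SSC e e' cs)

-- a dfsA call on the (pruned) node v with child chain c computes v1/v0 and finalises the subtree
def RunOK (c : RT) : Prop :=
  ∀ (v : Int) (e : EDict) (fuel : Nat),
    (labels (RT.node v c .nil)).Nodup →
    e.getD v PySem.Set.empty = labsTop c → InvL e c v →
    ((1 + 2 * (labels c).length ≤ fuel →
       ∃ e', dfsA fuel e v true = (v1 c, e') ∧ SSC e e' (.node v c .nil)) ∧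
     (2 + 2 * (labels c).length ≤ fuel →
       ∃ e', dfsA fuel e v false = (v0 c, e') ∧ SSC e e' (.node v c .nil)))

lemma discard_loop (v : Int) : ∀ (l : List Int) (e : EDict), l.Nodup →
    ∀ x, ((l.foldl (fun ed child =>
        ed.insert child (PySem.Set.discard (ed.getD child PySem.Set.empty) v)) e).getD x
          PySem.Set.empty)
      = if x ∈ l then PySem.Set.discard (e.getD x PySem.Set.empty) v
        else e.getD x PySem.Set.empty := by
  intro l
  induction l with
  | nil => intro e _ x; simp
  | cons h t ih =>
    intro e hnd x
    rw [List.foldl_cons]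
    rw [List.nodup_cons] at hnd
    rw [ih _ hnd.2 x]
    by_cases hxt : x ∈ t
    · have hxh : x ≠ h := fun he => hnd.1 (he ▸ hxt)
      rw [if_pos hxt, if_pos (by simp [hxt]), PySem.Dict.getD_insert]
      simp [hxh]
    · by_cases hxh : x = h
      · subst hxh
        rw [if_neg hxt, if_pos (by simp), PySem.Dict.getD_insert]
        simp
      · rw [if_neg hxt, if_neg (by simp [hxh, hxt]), PySem.Dict.getD_insert]
        simp [hxh]

lemma callL_after_discard : ∀ {cs : RT} {v : Int} {e e1 : EDict},
    InvL e cs v → (labels cs).Nodup →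
    (∀ x ∈ labels cs, e1.getD x PySem.Set.empty =
      if x ∈ labsTop cs then PySem.Set.discard (e.getD x PySem.Set.empty) v
      else e.getD x PySem.Set.empty) →
    CallL e1 cs v := by
  intro cs
  induction cs with
  | nil => intros; trivial
  | node c g s ihc ihs =>
    intro v e e1 hinv hnd hch
    rw [show labels (.node c g s) = c :: (labels g ++ labels s) from rfl] at hnd
    rw [List.nodup_cons, List.nodup_append] at hnd
    obtain ⟨hcm, hng, hns, hdisj⟩ := hnd
    refine ⟨?_, ?_, ?_⟩
    · have hx := hch c (by simp [labels])
      rw [if_pos (by simp [labsTop])] at hx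
      rw [hx, hinv.1]
    · refine invL_congr hinv.2.1 (fun x hm => ?_)
      have hx := hch x (by simp [labels, hm])
      rw [if_neg ?_] at hx
      · exact hx
      · intro hmem
        rcases (by simpa [labsTop] using hmem : x = c ∨ x ∈ labsTop s) with he | hts
        · exact hcm (by simp [he ▸ hm])
        · exact hdisj x hm x (mem_labels_of_mem_labsTop hts) rfl
    · refine ihs hinv.2.2 hns (fun x hm => ?_)
      have hx := hch x (by simp [labels, hm])
      have hxc : x ≠ c := fun he => hcm (by simp [he ▸ hm])
      by_cases hts : x ∈ labsTop s
      · rw [if_pos (by simp [labsTop, hts])] at hx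
        rw [if_pos hts]; exact hx
      · rw [if_neg (by simp [labsTop, hxc, hts])] at hx
        rw [if_neg hts]; exact hx

lemma ssc_lift {e E1 e2 : EDict} {v : Int} {c : RT}
    (hv : e.getD v PySem.Set.empty = labsTop c) (hvc : v ∉ labels c)
    (hE1 : ∀ x, E1.getD x PySem.Set.empty =
      if x ∈ labsTop c then PySem.Set.discard (e.getD x PySem.Set.empty) v
      else e.getD x PySem.Set.empty)
    (hssc : SSC E1 e2 c) : SSC e e2 (.node v c .nil) := by
  intro x
  by_cases hxv : v = x
  · subst hxv
    rw [show findC (.node v c .nil) v = some (labsTop c) by simp [findC]]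
    have h1 := hssc v
    rw [findC_eq_none hvc] at h1
    rw [h1, hE1 v, if_neg (fun hm => hvc (mem_labels_of_mem_labsTop hm))]
    simpa using hv
  · rw [show findC (.node v c .nil) x = (findC c x).orElse (fun _ => findC .nil x) by
      simp [findC, hxv]]
    have h1 := hssc x
    cases hf : findC c x with
    | some ls => rw [hf] at h1; rw [h1]; rfl
    | none =>
      have hxc : x ∉ labels c := fun hm => by
        have := findC_isSome_of_mem hm; rw [hf] at this; simp at this
      rw [hf] at h1
      rw [h1, hE1 x, if_neg (fun hm => hxc (mem_labels_of_mem_labsTop hm))]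
      rfl

lemma getD_eq_of_ssc_outside {e e' : EDict} {t : RT} (hssc : SSC e e' t) {x : Int}
    (hx : x ∉ labels t) : e'.getD x PySem.Set.empty = e.getD x PySem.Set.empty := by
  rw [hssc x, findC_eq_none hx]; rfl

lemma invL_of_ssc {E1 e2 : EDict} {c : RT} {v : Int}
    (hnd : (labels c).Nodup) (hvc : v ∉ labels c) (hssc : SSC E1 e2 c) : InvL e2 c v := by
  refine callL_to_invL (finCallL hnd hvc (fun x hm => ?_)) hvc
  obtain ⟨ls, hls⟩ := Option.isSome_iff_exists.1 (findC_isSome_of_mem hm)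
  rw [hssc x, hls]; rfl

lemma invL_of_ssc_T0 {e e1' : EDict} {c0 : Int} {g : RT}
    (hnd : (labels (RT.node c0 g .nil)).Nodup) (hssc : SSC e e1' (.node c0 g .nil)) :
    InvL e1' g c0 ∧ e1'.getD c0 PySem.Set.empty = labsTop g := by
  have hnd' := hnd
  rw [show labels (.node c0 g .nil) = c0 :: (labels g ++ []) from rfl, List.append_nil,
    List.nodup_cons] at hnd'
  obtain ⟨hc0g, hng⟩ := hnd'
  constructor
  · refine callL_to_invL (finCallL hng hc0g (fun x hm => ?_)) hc0g
    obtain ⟨ls, hls⟩ := Option.isSome_iff_exists.1 (findC_isSome_of_mem hm)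
    have hxc : ¬ c0 = x := fun he => hc0g (he ▸ hm)
    have := hssc x
    rw [show findC (.node c0 g .nil) x = (findC g x).orElse (fun _ => findC .nil x) by
      simp [findC, hxc], hls] at this
    rw [this, hls]; rfl
  · have := hssc c0
    rw [show findC (.node c0 g .nil) c0 = some (labsTop g) by simp [findC]] at this
    rw [this]; rfl

lemma chainOK_nil : ChainOK .nil := by
  intro v e fuel a _ _ _ _
  constructor <;>
    exact ⟨e, by simp [labsTop, Fp], fun x => by rw [findC_eq_none (by simp [labels])]; rfl⟩

lemma runOK_of_chain (c : RT) (hch : ChainOK c) : RunOK c := by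
  have hleaf : ∀ (v : Int) (e : EDict) (same : Bool) (f : Nat), c = RT.nil →
      e.getD v PySem.Set.empty = labsTop c →
      dfsA (f+1) e v same = ((if same then 1 else 0 : Int), e) := by
    intro v e same f hc hv
    subst hc
    simp [dfsA, show PySem.Dict.getD e v ([] : List Int) = [] from hv]
  have hsscleaf : ∀ (v : Int) (e : EDict), c = RT.nil →
      e.getD v PySem.Set.empty = labsTop c → SSC e e (.node v c .nil) := by
    intro v e hc hv x
    subst hc
    by_cases hxv : v = x
    · subst hxv
      rw [show findC (.node v .nil .nil) v = some (labsTop .nil) by simp [findC]]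
      simpa [labsTop] using hv
    · rw [show findC (.node v .nil .nil) x = none by simp [findC, hxv]]; rfl
  have htrue : ∀ (v : Int) (e : EDict) (fuel : Nat), (labels (RT.node v c .nil)).Nodup →
      e.getD v PySem.Set.empty = labsTop c → InvL e c v →
      1 + 2 * (labels c).length ≤ fuel →
      ∃ e', dfsA fuel e v true = (v1 c, e') ∧ SSC e e' (.node v c .nil) := by
    intro v e fuel hnd hv hinv hfuel
    have hnd' := hnd
    rw [show labels (.node v c .nil) = v :: (labels c ++ []) from rfl, List.append_nil,
      List.nodup_cons] at hnd'
    obtain ⟨hvc, hndc⟩ := hnd'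
    obtain ⟨f, rfl⟩ : ∃ f, fuel = f + 1 := ⟨fuel - 1, by omega⟩
    by_cases hcnil : c = RT.nil
    · exact ⟨e, by rw [hleaf v e true f hcnil hv]; simp [v1, hcnil],
        hsscleaf v e hcnil hv⟩
    · have hlne : labsTop c ≠ [] := by
        cases c with
        | nil => exact absurd rfl hcnil
        | node a b d => simp [labsTop]
      have hltnd : (labsTop c).Nodup := labsTop_nodup hndc
      rw [show dfsA (f+1) e v true =
        (let nbrs := e.getD v PySem.Set.empty
         if nbrs.length = 0 then ((1 : Int), e)
         else
           let e1 := nbrs.foldl (fun ed child =>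
             ed.insert child (PySem.Set.discard (ed.getD child PySem.Set.empty) v)) e
           nbrs.foldl (fun acc child =>
             let r0 := dfsA f acc.2 child false
             let r1 := dfsA f r0.2 child true
             (acc.1 * (r0.1 + r1.1), r1.2)) ((1 : Int), e1)) from rfl]
      rw [hv]
      simp only [List.length_eq_zero_iff]
      rw [if_neg hlne]
      have hE1 := discard_loop v (labsTop c) e hltnd
      have hcall : CallL ((labsTop c).foldl (fun ed child =>
          ed.insert child (PySem.Set.discard (ed.getD child PySem.Set.empty) v)) e) c v :=
        callL_after_discard hinv hndc (fun x _ => hE1 x)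
      obtain ⟨-, e2, hfold, hssc⟩ := hch v _ f 1 hndc hvc hcall (by omega)
      exact ⟨e2, by rw [hfold]; simp [v1, hcnil], ssc_lift hv hvc hE1 hssc⟩
  intro v e fuel hnd hv hinv
  refine ⟨htrue v e fuel hnd hv hinv, ?_⟩
  intro hfuel
  have hnd' := hnd
  rw [show labels (.node v c .nil) = v :: (labels c ++ []) from rfl, List.append_nil,
    List.nodup_cons] at hnd'
  obtain ⟨hvc, hndc⟩ := hnd'
  obtain ⟨f, rfl⟩ : ∃ f, fuel = f + 1 := ⟨fuel - 1, by omega⟩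
  by_cases hcnil : c = RT.nil
  · exact ⟨e, by rw [hleaf v e false f hcnil hv]; simp [v0, hcnil],
      hsscleaf v e hcnil hv⟩
  · have hlne : labsTop c ≠ [] := by
      cases c with
      | nil => exact absurd rfl hcnil
      | node a b d => simp [labsTop]
    have hltnd : (labsTop c).Nodup := labsTop_nodup hndc
    rw [show dfsA (f+1) e v false =
      (let nbrs := e.getD v PySem.Set.empty
       if nbrs.length = 0 then ((0 : Int), e)
       else
         let e1 := nbrs.foldl (fun ed child =>
           ed.insert child (PySem.Set.discard (ed.getD child PySem.Set.empty) v)) e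
         let cnt := nbrs.foldl (fun acc child =>
           let r0 := dfsA f acc.2 child false
           (acc.1 * r0.1, r0.2)) ((1 : Int), e1)
         let rt := dfsA f cnt.2 v true
         (rt.1 - cnt.1, rt.2)) from rfl]
    rw [hv]
    simp only [List.length_eq_zero_iff]
    rw [if_neg hlne]
    have hE1 := discard_loop v (labsTop c) e hltnd
    have hcall : CallL ((labsTop c).foldl (fun ed child =>
        ed.insert child (PySem.Set.discard (ed.getD child PySem.Set.empty) v)) e) c v :=
      callL_after_discard hinv hndc (fun x _ => hE1 x)
    obtain ⟨⟨e2, hfold, hssc⟩, -⟩ := hch v _ f 1 hndc hvc hcall (by omega)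
    have hssc0 : SSC e e2 (.node v c .nil) := ssc_lift hv hvc hE1 hssc
    have hv2 : e2.getD v PySem.Set.empty = labsTop c := by
      have := hssc0 v
      rw [show findC (.node v c .nil) v = some (labsTop c) by simp [findC]] at this
      rw [this]; rfl
    have hinv2 : InvL e2 c v := invL_of_ssc hndc hvc hssc
    obtain ⟨e3, hrt, hssc3⟩ := htrue v e2 f hnd hv2 hinv2 (by omega)
    refine ⟨e3, ?_, ssc_trans hssc0 hssc3⟩
    show (let cnt := (labsTop c).foldl (fun acc child =>
           let r0 := dfsA f acc.2 child false
           (acc.1 * r0.1, r0.2)) ((1 : Int), _)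
         let rt := dfsA f cnt.2 v true
         (rt.1 - cnt.1, rt.2)) = (v0 c, e3)
    rw [show ((labsTop c).foldl (fun acc child =>
           let r0 := dfsA f acc.2 child false
           (acc.1 * r0.1, r0.2)) ((1 : Int), (labsTop c).foldl (fun ed child =>
        ed.insert child (PySem.Set.discard (ed.getD child PySem.Set.empty) v)) e)) =
        (1 * (Fp c).1, e2) from hfold]
    show ((dfsA f e2 v true).1 - 1 * (Fp c).1, (dfsA f e2 v true).2) = (v0 c, e3)
    rw [hrt]
    simp [v0, v1, hcnil]

lemma chainOK_all : ∀ (cs : RT), ChainOK cs := by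
  suffices h : ∀ (n : Nat) (cs : RT), (labels cs).length ≤ n → ChainOK cs from
    fun cs => h (labels cs).length cs le_rfl
  intro n
  induction n with
  | zero =>
    intro cs hlen
    cases cs with
    | nil => exact chainOK_nil
    | node c g s => simp [labels] at hlen
  | succ n ih =>
    intro cs hlen
    cases cs with
    | nil => exact chainOK_nil
    | node c0 g s =>
      intro v e fuel a hnd hvm hcall hfuel
      have hnd' := hnd
      rw [show labels (.node c0 g s) = c0 :: (labels g ++ labels s) from rfl] at hnd'
      rw [List.nodup_cons, List.nodup_append] at hnd'
      obtain ⟨hcm, hng, hns, hdisj⟩ := hnd'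
      have hc0g : c0 ∉ labels g := fun hm => hcm (by simp [hm])
      have hlen' : (labels (.node c0 g s)).length = 1 + (labels g).length + (labels s).length := by
        simp [labels]; omega
      have hRg : RunOK g := runOK_of_chain g (ih g (by rw [hlen'] at hlen; omega))
      have hCs : ChainOK s := ih s (by rw [hlen'] at hlen; omega)
      have hndT0 : (labels (RT.node c0 g .nil)).Nodup := by
        rw [show labels (.node c0 g .nil) = c0 :: (labels g ++ []) from rfl, List.append_nil,
          List.nodup_cons]
        exact ⟨hc0g, hng⟩
      obtain ⟨hc0, hinvg, hcalls⟩ := hcall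
      have hvs : v ∉ labels s := fun hm => hvm (by simp [labels, hm])
      have hvT0 : ∀ x, x ∈ labels s → x ∉ labels (RT.node c0 g .nil) := by
        intro x hm hmem
        rw [show labels (.node c0 g .nil) = c0 :: (labels g ++ []) from rfl, List.append_nil] at hmem
        rcases (by simpa using hmem : x = c0 ∨ x ∈ labels g) with he | hg
        · exact hcm (by simp [he ▸ hm])
        · exact hdisj x hg x hm rfl
      constructor
      · -- false fold
        obtain ⟨-, hR⟩ := hRg c0 e fuel hndT0 hc0 hinvg
        obtain ⟨e1', hr0, hssc1⟩ := hR (by rw [hlen'] at hfuel; omega)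
        rw [show labsTop (.node c0 g s) = c0 :: labsTop s from rfl, List.foldl_cons]
        show (∃ e', (labsTop s).foldl _ ((a * (dfsA fuel e c0 false).1, (dfsA fuel e c0 false).2) :
            Int × EDict) = _ ∧ _)
        rw [hr0]
        have hcalls1 : CallL e1' s v :=
          callL_congr hcalls (fun x hm => getD_eq_of_ssc_outside hssc1 (hvT0 x hm))
        obtain ⟨⟨e2, hfold2, hssc2⟩, -⟩ :=
          hCs v e1' fuel (a * v0 g) hns hvs hcalls1 (by rw [hlen'] at hfuel; omega)
        refine ⟨e2, ?_, ssc_head_chain hnd hssc1 hssc2⟩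
        rw [hfold2, Fp_node]
        simp [mul_assoc]
      · -- true fold
        obtain ⟨-, hR⟩ := hRg c0 e fuel hndT0 hc0 hinvg
        obtain ⟨e1', hr0, hssc1⟩ := hR (by rw [hlen'] at hfuel; omega)
        obtain ⟨hinvg1, hc01⟩ := invL_of_ssc_T0 hndT0 hssc1
        obtain ⟨hT, -⟩ := hRg c0 e1' fuel hndT0 hc01 hinvg1
        obtain ⟨e1'', hr1, hssc1'⟩ := hT (by rw [hlen'] at hfuel; omega)
        have hsscT0 : SSC e e1'' (.node c0 g .nil) := ssc_trans hssc1 hssc1'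
        rw [show labsTop (.node c0 g s) = c0 :: labsTop s from rfl, List.foldl_cons]
        show (∃ e', (labsTop s).foldl _
            ((a * ((dfsA fuel e c0 false).1 + (dfsA fuel (dfsA fuel e c0 false).2 c0 true).1),
              (dfsA fuel (dfsA fuel e c0 false).2 c0 true).2) : Int × EDict) = _ ∧ _)
        rw [hr0]
        rw [hr1]
        have hcalls1 : CallL e1'' s v :=
          callL_congr hcalls (fun x hm => getD_eq_of_ssc_outside hsscT0 (hvT0 x hm))
        obtain ⟨-, ⟨e2, hfold2, hssc2⟩⟩ :=
          hCs v e1'' fuel (a * (v0 g + v1 g)) hns hvs hcalls1 (by rw [hlen'] at hfuel; omega)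
        refine ⟨e2, ?_, ssc_head_chain hnd hsscT0 hssc2⟩
        rw [hfold2, Fp_node]
        simp [mul_assoc]

lemma foldl_discard {α : Type} (step : α → Int → α) (p : Int) (hp : ∀ st, step st p = st) :
    ∀ (l : List Int) (st : α), l.foldl step st = (PySem.Set.discard l p).foldl step st := by
  intro l
  induction l with
  | nil => intro st; rfl
  | cons w t ih =>
    intro st
    by_cases hw : w = p
    · subst hw
      rw [List.foldl_cons, hp st, ih st,
        show PySem.Set.discard (w :: t) w = PySem.Set.discard t w by
          simp [discard_eq_filter]]
    · rw [List.foldl_cons,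
        show PySem.Set.discard (w :: t) p = w :: PySem.Set.discard t p by
          simp [discard_eq_filter, hw], List.foldl_cons, ih]

-- the loop body of solveB, named for rewriting
def bstep (f : Nat) (adj : EDict) (v p : Int) (st : Int × Int × Bool) (w : Int) :
    Int × Int × Bool :=
  if w ≠ p then
    let c := solveB f adj w v
    (st.1 * c.1, st.2.1 * (c.1 + c.2), false)
  else st

lemma bstep_ne {f : Nat} {adj : EDict} {v p w : Int} (st : Int × Int × Bool) (hw : w ≠ p) :
    bstep f adj v p st w =
      (st.1 * (solveB f adj w v).1,
       st.2.1 * ((solveB f adj w v).1 + (solveB f adj w v).2), false) := by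
  simp [bstep, hw]

lemma solveB_succ (f : Nat) (adj : EDict) (v p : Int) :
    solveB (f+1) adj v p =
      (let st := (adj.getD v []).foldl (bstep f adj v p) ((1 : Int), (1 : Int), true)
       if st.2.2 then ((0 : Int), (1 : Int)) else (st.2.1 - st.1, st.2.1)) := rfl

-- solveB computes (v0, v1) of the node v with child chain c (parent p)
def BOK (c : RT) : Prop :=
  ∀ (v p : Int) (adj : EDict) (fuel : Nat),
    PySem.Set.discard (adj.getD v []) p = labsTop c →
    RepT (fun x => adj.getD x []) c v →
    1 + (labels c).length ≤ fuel →
    solveB fuel adj v p = (v0 c, v1 c)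

lemma bok_all : ∀ (c : RT), BOK c := by
  suffices h : ∀ (n : Nat) (c : RT), (labels c).length ≤ n → BOK c from
    fun c => h (labels c).length c le_rfl
  intro n
  induction n with
  | zero =>
    intro c hlen v p adj fuel hadj hrep hfuel
    cases c with
    | node a b d => simp [labels] at hlen
    | nil =>
      obtain ⟨f, rfl⟩ : ∃ f, fuel = f + 1 := ⟨fuel - 1, by omega⟩
      rw [solveB_succ, foldl_discard _ p (by intro st; simp [bstep]), hadj]
      simp [labsTop, v0, v1]
  | succ n ih =>
    intro c hlen v p adj fuel hadj hrep hfuel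
    obtain ⟨f, rfl⟩ : ∃ f, fuel = f + 1 := ⟨fuel - 1, by omega⟩
    have hfold : ∀ (cs : RT), (labels cs).length ≤ (labels c).length →
        RepT (fun x => adj.getD x []) cs v →
        (∀ w ∈ labsTop cs, w ≠ p) →
        ∀ (st : Int × Int × Bool),
        (labsTop cs).foldl (bstep f adj v p) st =
        (st.1 * (Fp cs).1, st.2.1 * (Fp cs).2, if cs = .nil then st.2.2 else false) := by
      intro cs
      induction cs with
      | nil => intro _ _ _ st; simp [labsTop, Fp]
      | node c0 g s ihg ihs =>
        intro hlcs hrepcs hnp st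
        have hc0p : c0 ≠ p := hnp c0 (by simp [labsTop])
        have hlg : (labels (RT.node c0 g s)).length
            = 1 + (labels g).length + (labels s).length := by simp [labels]; omega
        have hsolve : solveB f adj c0 v = (v0 g, v1 g) := by
          have hbg : BOK g := ih g (by omega)
          exact hbg c0 v adj f hrepcs.1 hrepcs.2.1 (by omega)
        rw [show labsTop (.node c0 g s) = c0 :: labsTop s from rfl, List.foldl_cons,
          bstep_ne st hc0p, hsolve,
          ihs (by omega) hrepcs.2.2 (fun w hw => hnp w (by simp [labsTop, hw])) _, Fp_node]
        have hne : RT.node c0 g s ≠ RT.nil := by intro h; cases h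
        simp [hne, mul_assoc]
    rw [solveB_succ, foldl_discard _ p (by intro st; simp [bstep]), hadj]
    by_cases hcnil : c = RT.nil
    · subst hcnil
      simp [labsTop, v0, v1]
    · have hnp : ∀ w ∈ labsTop c, w ≠ p := by
        intro w hw
        rw [← hadj] at hw
        exact ((PySem.Set.mem_discard _ _ _).1 hw).2
      rw [hfold c le_rfl hrep hnp _]
      simp [hcnil, v0, v1]

lemma step_ok_false (st : List Int × List (Int × Int) × List (Int × Int) × Bool)
    (ab : Int × Int) (h : st.2.2.2 = false) : (pvScanStep st ab).2.2.2 = false := by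
  unfold pvScanStep
  split_ifs <;> simp [h]

lemma scan_ok_false : ∀ (es : List (Int × Int)) st, st.2.2.2 = false →
    (List.foldl pvScanStep st es).2.2.2 = false := by
  intro es
  induction es with
  | nil => intro st h; exact h
  | cons ab es ih => intro st h; rw [List.foldl_cons]; exact ih _ (step_ok_false st ab h)

lemma scan_S_sub : ∀ (es : List (Int × Int)) st, st.1 ⊆ (List.foldl pvScanStep st es).1 := by
  intro es
  induction es with
  | nil => intro st; exact fun _ h => h
  | cons ab es ih =>
    intro st
    refine subset_trans ?_ (ih (pvScanStep st ab))
    unfold pvScanStep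
    split_ifs <;> simp

lemma scan_part : ∀ (es : List (Int × Int)) st,
    ((List.foldl pvScanStep st es).2.1 ++ (List.foldl pvScanStep st es).2.2.1).Perm
      (st.2.1 ++ st.2.2.1 ++ es) := by
  intro es
  induction es with
  | nil => intro st; simp
  | cons ab es ih =>
    intro st
    rw [List.foldl_cons]
    have h : ((pvScanStep st ab).2.1 ++ (pvScanStep st ab).2.2.1).Perm
        (st.2.1 ++ st.2.2.1 ++ [ab]) := by
      unfold pvScanStep
      split_ifs <;>
        simp only [List.append_assoc] <;>
        first
          | exact List.Perm.refl _
          | exact List.Perm.append_left st.2.1 (List.perm_append_comm)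
    have e1 : (st.2.1 ++ st.2.2.1 ++ [ab]) ++ es = st.2.1 ++ st.2.2.1 ++ (ab :: es) := by simp
    exact (ih _).trans (e1 ▸ (h.append_right es))

lemma scanInv_fold : ∀ (es : List (Int × Int)) st, ScanInv st.1 st.2.1 →
    (List.foldl pvScanStep st es).2.2.2 = true →
    ScanInv (List.foldl pvScanStep st es).1 (List.foldl pvScanStep st es).2.1 := by
  intro es
  induction es with
  | nil => intro st h _; exact h
  | cons ab es ih =>
    intro st hInv hok
    rw [List.foldl_cons] at hok ⊢
    by_cases h1 : ab.1 ∈ st.1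
    · by_cases h2 : ab.2 ∈ st.1
      · exfalso
        have : (pvScanStep st ab).2.2.2 = false := by unfold pvScanStep; simp [h1, h2]
        rw [scan_ok_false es _ this] at hok
        cases hok
      · have hstep : pvScanStep st ab = (st.1 ++ [ab.2], st.2.1 ++ [ab], st.2.2.1, st.2.2.2) := by
          unfold pvScanStep; simp [h1, h2]
        rw [hstep] at hok ⊢
        exact ih _ (scanInv_step hInv h1 h2 (Or.inl rfl)) hok
    · by_cases h2 : ab.2 ∈ st.1
      · have hstep : pvScanStep st ab = (st.1 ++ [ab.1], st.2.1 ++ [ab], st.2.2.1, st.2.2.2) := by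
          unfold pvScanStep; simp [h1, h2]
        rw [hstep] at hok ⊢
        exact ih _ (scanInv_step hInv h2 h1 (Or.inr rfl)) hok
      · have hstep : pvScanStep st ab = (st.1, st.2.1, st.2.2.1 ++ [ab], st.2.2.2) := by
          unfold pvScanStep; simp [h1, h2]
        rw [hstep] at hok ⊢
        exact ih _ hInv hok

lemma scanN_ok_false : ∀ (k : Nat) st, st.2.2.2 = false → (pvScanN k st).2.2.2 = false := by
  intro k
  induction k with
  | zero => intro st h; exact h
  | succ k ih =>
    intro st h
    show (pvScanN k (List.foldl pvScanStep (st.1, st.2.1, [], st.2.2.2) st.2.2.1)).2.2.2 = false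
    exact ih _ (scan_ok_false st.2.2.1 (st.1, st.2.1, [], st.2.2.2) h)

lemma scanN_S_sub : ∀ (k : Nat) st, st.1 ⊆ (pvScanN k st).1 := by
  intro k
  induction k with
  | zero => intro st; exact fun _ h => h
  | succ k ih =>
    intro st
    refine subset_trans ?_ (ih (List.foldl pvScanStep (st.1, st.2.1, [], st.2.2.2) st.2.2.1))
    exact scan_S_sub st.2.2.1 (st.1, st.2.1, [], st.2.2.2)

lemma scanN_inv : ∀ (k : Nat) st, ScanInv st.1 st.2.1 → (pvScanN k st).2.2.2 = true →
    ScanInv (pvScanN k st).1 (pvScanN k st).2.1 ∧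
    ((pvScanN k st).2.1 ++ (pvScanN k st).2.2.1).Perm (st.2.1 ++ st.2.2.1) := by
  intro k
  induction k with
  | zero => intro st h _; exact ⟨h, List.Perm.refl _⟩
  | succ k ih =>
    intro st hInv hok
    have hok' : (pvScanN k (List.foldl pvScanStep (st.1, st.2.1, [], st.2.2.2) st.2.2.1)).2.2.2
        = true := hok
    have hok1 : (List.foldl pvScanStep (st.1, st.2.1, [], st.2.2.2) st.2.2.1).2.2.2 = true := by
      cases hpr : (List.foldl pvScanStep (st.1, st.2.1, [], st.2.2.2) st.2.2.1).2.2.2 with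
      | true => rfl
      | false =>
        have := scanN_ok_false k _ hpr
        rw [this] at hok'
        exact absurd hok' (by simp)
    have hInv1 := scanInv_fold st.2.2.1 (st.1, st.2.1, [], st.2.2.2) hInv hok1
    obtain ⟨h1, h2⟩ := ih (List.foldl pvScanStep (st.1, st.2.1, [], st.2.2.2) st.2.2.1) hInv1 hok'
    refine ⟨h1, h2.trans ?_⟩
    have := scan_part st.2.2.1 (st.1, st.2.1, [], st.2.2.2)
    simpa using this

lemma adjOf_perm {es es' : List (Int × Int)} (h : es.Perm es') (x : Int) :
    (adjOf es x).Perm (adjOf es' x) := by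
  unfold adjOf
  exact h.flatMap (fun a _ => List.Perm.refl _)

lemma adjOf_nil_of_disjoint : ∀ (es : List (Int × Int)) (v : Int),
    (∀ ab ∈ es, ab.1 ≠ v ∧ ab.2 ≠ v) → adjOf es v = [] := by
  intro es v
  induction es with
  | nil => intro _; rfl
  | cons ab es ih =>
    intro h
    rw [adjOf_cons]
    have h1 := (h ab (by simp)).1
    have h2 := (h ab (by simp)).2
    rw [ih (fun x hx => h x (by simp [hx]))]
    simp [h1, h2]

-- the adjacency / degree components of the two ports' build folds, named
def adjStepA (e : EDict) (ab : Int × Int) : EDict :=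
  let e1 := e.insert ab.1 (PySem.Set.add (e.getD ab.1 PySem.Set.empty) ab.2)
  e1.insert ab.2 (PySem.Set.add (e1.getD ab.2 PySem.Set.empty) ab.1)

def adjStepB (e : PySem.Dict Int (List Int)) (ab : Int × Int) : PySem.Dict Int (List Int) :=
  let e1 := e.insert ab.1 (e.getD ab.1 [] ++ [ab.2])
  e1.insert ab.2 (e1.getD ab.2 [] ++ [ab.1])

def degStep (d : PySem.Dict Int Int) (ab : Int × Int) : PySem.Dict Int Int :=
  let d1 := d.insert ab.1 (d.getD ab.1 0 + 1)
  d1.insert ab.2 (d1.getD ab.2 0 + 1)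

lemma foldA_eq : ∀ (roads : List (List Int)) (init : EDict × PySem.Dict Int Int),
    (∀ r ∈ roads, r.length = 2) →
    roads.foldl
      (fun (st : PySem.Dict Int (PySem.Set Int) × PySem.Dict Int Int) road =>
        match pvAsPair road with
        | some (a, b) =>
          let e := st.1.insert a (PySem.Set.add (st.1.getD a PySem.Set.empty) b)
          let e := e.insert b (PySem.Set.add (e.getD b PySem.Set.empty) a)
          let d := st.2.insert a (st.2.getD a 0 + 1)
          let d := d.insert b (d.getD b 0 + 1)
          (e, d)
        | none => st) init
    = (pvPairs roads).foldl (fun st ab => (adjStepA st.1 ab, degStep st.2 ab)) init := by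
  intro roads
  induction roads with
  | nil => intro init _; rfl
  | cons r rs ih =>
    intro init hwf
    obtain ⟨a, b, rfl⟩ := List.length_eq_two.1 (hwf r (by simp))
    rw [show pvPairs ([a, b] :: rs) = (a, b) :: pvPairs rs by simp [pvPairs, pvAsPair],
      List.foldl_cons, List.foldl_cons]
    exact ih _ (fun r hr => hwf r (by simp [hr]))

lemma foldB_eq : ∀ (roads : List (List Int)) (init : PySem.Dict Int (List Int) × PySem.Dict Int Int),
    (∀ r ∈ roads, r.length = 2) →
    roads.foldl
      (fun (st : PySem.Dict Int (List Int) × PySem.Dict Int Int) road =>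
        (pvAsPair road).elim st (fun ab =>
          let ad := st.1.insert ab.1 (st.1.getD ab.1 [] ++ [ab.2])
          let ad := ad.insert ab.2 (ad.getD ab.2 [] ++ [ab.1])
          let d := st.2.insert ab.1 (st.2.getD ab.1 0 + 1)
          let d := d.insert ab.2 (d.getD ab.2 0 + 1)
          (ad, d))) init
    = (pvPairs roads).foldl (fun st ab => (adjStepB st.1 ab, degStep st.2 ab)) init := by
  intro roads
  induction roads with
  | nil => intro init _; rfl
  | cons r rs ih =>
    intro init hwf
    obtain ⟨a, b, rfl⟩ := List.length_eq_two.1 (hwf r (by simp))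
    rw [show pvPairs ([a, b] :: rs) = (a, b) :: pvPairs rs by simp [pvPairs, pvAsPair],
      List.foldl_cons, List.foldl_cons]
    exact ih _ (fun r hr => hwf r (by simp [hr]))

lemma fold_pair_proj {α β : Type} (f : α → Int × Int → α) (g : β → Int × Int → β) :
    ∀ (es : List (Int × Int)) (x : α) (y : β),
    es.foldl (fun st ab => (f st.1 ab, g st.2 ab)) (x, y) = (es.foldl f x, es.foldl g y) := by
  intro es
  induction es with
  | nil => intro x y; rfl
  | cons ab es ih => intro x y; rw [List.foldl_cons, List.foldl_cons, List.foldl_cons]; exact ih _ _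

lemma set_add_of_not_mem {l : List Int} {x : Int} (h : x ∉ l) :
    PySem.Set.add l x = l ++ [x] := by
  simp [PySem.Set.add, h]

-- contents of the A-side adjacency dict: per key, a fold of Set.add over that key's raw adjacency
lemma getD_adjStepA (e : EDict) (ab : Int × Int) (x : Int) :
    (adjStepA e ab).getD x PySem.Set.empty =
      ((if ab.1 = x then [ab.2] else []) ++ (if ab.2 = x then [ab.1] else [])).foldl
        PySem.Set.add (e.getD x PySem.Set.empty) := by
  unfold adjStepA
  simp only [PySem.Dict.getD_insert]
  by_cases h1 : x = ab.1 <;> by_cases h2 : x = ab.2 <;> by_cases h3 : ab.1 = ab.2 <;>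
    simp [h1, h2, h3, eq_comm] <;> simp_all

lemma getD_foldA : ∀ (es : List (Int × Int)) (e : EDict) (x : Int),
    ((es.foldl adjStepA e).getD x PySem.Set.empty)
      = (adjOf es x).foldl PySem.Set.add (e.getD x PySem.Set.empty) := by
  intro es
  induction es with
  | nil => intro e x; rfl
  | cons ab es ih =>
    intro e x
    rw [List.foldl_cons, ih (adjStepA e ab) x, adjOf_cons, List.foldl_append, getD_adjStepA]

lemma getD_adjStepB (e : PySem.Dict Int (List Int)) (ab : Int × Int) (x : Int) :
    (adjStepB e ab).getD x [] =
      e.getD x [] ++ ((if ab.1 = x then [ab.2] else []) ++ (if ab.2 = x then [ab.1] else [])) := by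
  unfold adjStepB
  simp only [PySem.Dict.getD_insert]
  by_cases h1 : x = ab.1 <;> by_cases h2 : x = ab.2 <;> by_cases h3 : ab.1 = ab.2 <;>
    simp [h1, h2, h3, eq_comm] <;> simp_all

lemma getD_foldB : ∀ (es : List (Int × Int)) (e : PySem.Dict Int (List Int)) (x : Int),
    ((es.foldl adjStepB e).getD x []) = e.getD x [] ++ adjOf es x := by
  intro es
  induction es with
  | nil => intro e x; simp [adjOf_nil]
  | cons ab es ih =>
    intro e x
    rw [List.foldl_cons, ih (adjStepB e ab) x, adjOf_cons, getD_adjStepB, List.append_assoc]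

lemma foldl_add_eq_append : ∀ (l acc : List Int), l.Nodup → (∀ a ∈ l, a ∉ acc) →
    l.foldl PySem.Set.add acc = acc ++ l := by
  intro l
  induction l with
  | nil => intro acc _ _; simp
  | cons a l ih =>
    intro acc hnd hdisj
    rw [List.nodup_cons] at hnd
    rw [List.foldl_cons, set_add_of_not_mem (hdisj a (by simp))]
    rw [ih (acc ++ [a]) hnd.2 ?_]
    · simp
    · intro b hb
      rw [List.mem_append]
      rintro (h | h)
      · exact hdisj b (by simp [hb]) h
      · simp at h
        exact hnd.1 (h ▸ hb)

lemma find?_congr : ∀ (l : List Int) (p q : Int → Bool), (∀ x ∈ l, p x = q x) →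
    l.find? p = l.find? q := by
  intro l
  induction l with
  | nil => intro p q _; rfl
  | cons a l ih =>
    intro p q h
    rw [List.find?_cons, List.find?_cons, h a (by simp)]
    cases q a
    · exact ih p q (fun x hx => h x (by simp [hx]))
    · rfl

lemma deg_getD : ∀ (es : List (Int × Int)) (d : PySem.Dict Int Int) (v : Int),
    (es.foldl degStep d).getD v 0
      = d.getD v 0 + ((es.flatMap (fun ab => [ab.1, ab.2])).count v : Int) := by
  intro es
  induction es with
  | nil => intro d v; simp
  | cons ab es ih =>
    intro d v
    rw [List.foldl_cons, ih (degStep d ab) v]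
    have hcnt : (((ab :: es).flatMap (fun ab => [ab.1, ab.2])).count v : Int)
        = (if ab.1 = v then 1 else 0) + (if ab.2 = v then 1 else 0)
          + ((es.flatMap (fun ab => [ab.1, ab.2])).count v : Int) := by
      rw [List.flatMap_cons, List.count_append]
      simp only [List.count_cons, List.count_nil]
      by_cases h1 : ab.1 = v <;> by_cases h2 : ab.2 = v <;> simp [h1, h2] <;> push_cast <;> omega
    have hstep : (degStep d ab).getD v 0
        = d.getD v 0 + (if ab.1 = v then 1 else 0) + (if ab.2 = v then 1 else 0) := by
      simp only [degStep, PySem.Dict.getD_insert]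
      by_cases h1 : v = ab.1 <;> by_cases h2 : v = ab.2 <;>
        simp [h1, h2, eq_comm] <;> omega
    rw [hcnt, hstep]
    ring

lemma set_update_append (l : List Int) (xs ys : List Int) :
    PySem.Set.update l (xs ++ ys) = PySem.Set.update (PySem.Set.update l xs) ys := by
  simp [PySem.Set.update, List.foldl_append]

lemma keys_insert_add (d : PySem.Dict Int Int) (k : Int) (x : Int) :
    (d.insert k x).keys = PySem.Set.add d.keys k := by
  by_cases hm : k ∈ d.keys
  · rw [PySem.Dict.keys_insert_of_contains _ _ ((PySem.Dict.contains_iff_mem_keys _ _).2 hm)]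
    simp [PySem.Set.add, hm]
  · rw [PySem.Dict.keys_insert_of_not_contains]
    · simp [PySem.Set.add, hm]
    · cases hc : d.contains k
      · rfl
      · exact absurd ((PySem.Dict.contains_iff_mem_keys _ _).1 hc) hm

lemma deg_keys : ∀ (es : List (Int × Int)) (d : PySem.Dict Int Int),
    (es.foldl degStep d).keys = PySem.Set.update d.keys (es.flatMap (fun ab => [ab.1, ab.2])) := by
  intro es
  induction es with
  | nil => intro d; simp [PySem.Set.update]
  | cons ab es ih =>
    intro d
    rw [List.foldl_cons, ih (degStep d ab), List.flatMap_cons, set_update_append]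
    congr 1
    show (degStep d ab).keys = PySem.Set.update d.keys [ab.1, ab.2]
    rw [show degStep d ab = (d.insert ab.1 (d.getD ab.1 0 + 1)).insert ab.2
        ((d.insert ab.1 (d.getD ab.1 0 + 1)).getD ab.2 0 + 1) from rfl]
    rw [keys_insert_add, keys_insert_add]
    rfl

lemma root_eq (roads : List (List Int)) :
    ((pvPairs roads).foldl degStep PySem.Dict.empty).keys.find?
      (fun v => ((pvPairs roads).foldl degStep PySem.Dict.empty).getD v 0 == 1)
    = pvRootOf roads := by
  unfold pvRootOf
  rw [deg_keys]
  have hkeys : PySem.Set.update (PySem.Dict.keys (PySem.Dict.empty : PySem.Dict Int Int))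
      ((pvPairs roads).flatMap (fun ab => [ab.1, ab.2]))
      = PySem.List.dedup ((pvPairs roads).flatMap (fun ab => [ab.1, ab.2])) := by
    rw [PySem.List.dedup_eq_ofList, PySem.Set.ofList_eq_foldl]
    rfl
  rw [hkeys]
  refine find?_congr _ _ _ (fun x _ => ?_)
  rw [deg_getD]
  simp

lemma portA_eq (n : Int) (roads : List (List Int)) (hwf : ∀ r ∈ roads, r.length = 2) :
    kingdomDivision n roads =
      PySem.Int.mod (2 * (match ((pvPairs roads).foldl degStep PySem.Dict.empty).keys.find?
          (fun v => ((pvPairs roads).foldl degStep PySem.Dict.empty).getD v 0 == 1) with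
        | some r => (dfsA (2 * roads.length + 4)
            ((pvPairs roads).foldl adjStepA PySem.Dict.empty) r false).1
        | none => 0)) (10 ^ 9 + 7) := by
  unfold kingdomDivision
  rw [foldA_eq roads _ hwf, fold_pair_proj]

lemma portB_eq (n : Int) (roads : List (List Int)) (hwf : ∀ r ∈ roads, r.length = 2) :
    kingdomDivision_alt n roads =
      (((pvPairs roads).foldl degStep PySem.Dict.empty).keys.find?
          (fun v => ((pvPairs roads).foldl degStep PySem.Dict.empty).getD v 0 == 1)).elim 0
        (fun r => PySem.Int.mod (2 * (solveB (roads.length + 2)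
            ((pvPairs roads).foldl adjStepB PySem.Dict.empty) r r).1) (10 ^ 9 + 7)) := by
  unfold kingdomDivision_alt
  rw [foldB_eq roads _ hwf, fold_pair_proj]

lemma scanInv_init (rt : Int) : ScanInv [rt] [] := by
  refine ⟨by simp, by simp, fun x _ => rfl, fun x => by simp [adjOf], fun x => by simp [adjOf],
    fun x w h => by simp [adjOf] at h, fun r hr => ?_⟩
  have : r = rt := by simpa using hr
  subst this
  exact ⟨.nil, ⟨rfl, trivial, trivial⟩, by simp [labels]⟩

lemma rep_to_invL {adj : Int → List Int} {e : EDict} : ∀ {cs : RT} {p : Int},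
    RepT adj cs p → (∀ x ∈ labels cs, e.getD x PySem.Set.empty = adj x) → InvL e cs p := by
  intro cs
  induction cs with
  | nil => intro p _ _; trivial
  | node c g s ihc ihs =>
    intro p h hx
    exact ⟨by rw [hx c (by simp [labels])]; exact h.1,
      ihc h.2.1 (fun x hm => hx x (by simp [labels, hm])),
      ihs h.2.2 (fun x hm => hx x (by simp [labels, hm]))⟩

-- ----- reordering the scan's tree to the original-road-order adjacency -----

def chainChild : RT → Int → RT
  | .nil, _ => .nil
  | .node a c s, l => if a = l then c else chainChild s l

def chainRest : RT → Int → RT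
  | .nil, _ => .nil
  | .node a c s, l => if a = l then s else .node a c (chainRest s l)

lemma perm_shuffle (a l : Int) (X Y Z : List Int) :
    (a :: (X ++ (l :: (Y ++ Z)))).Perm (l :: (Y ++ (a :: (X ++ Z)))) := by
  rw [List.perm_iff_count]
  intro x
  simp only [List.count_cons, List.count_append]
  omega

lemma chain_decomp (adjS : Int → List Int) : ∀ (t : RT) (v l : Int),
    RepT adjS t v → l ∈ labsTop t →
    PySem.Set.discard (adjS l) v = labsTop (chainChild t l) ∧
    RepT adjS (chainChild t l) l ∧ RepT adjS (chainRest t l) v ∧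
    (labsTop t).Perm (l :: labsTop (chainRest t l)) ∧
    (labels t).Perm (l :: (labels (chainChild t l) ++ labels (chainRest t l))) := by
  intro t
  induction t with
  | nil => intro v l _ h; simp [labsTop] at h
  | node a c s ihc ihs =>
    intro v l hrep hl
    by_cases hal : a = l
    · subst hal
      simp only [chainChild, chainRest, if_pos rfl]
      exact ⟨hrep.1, hrep.2.1, hrep.2.2, List.Perm.refl _, List.Perm.refl _⟩
    · have hls : l ∈ labsTop s := by
        rcases (by simpa [labsTop] using hl : l = a ∨ l ∈ labsTop s) with h | h
        · exact absurd h.symm hal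
        · exact h
      obtain ⟨h1, h2, h3, h4, h5⟩ := ihs v l hrep.2.2 hls
      simp only [chainChild, chainRest, if_neg hal]
      refine ⟨h1, h2, ⟨hrep.1, hrep.2.1, h3⟩, ?_, ?_⟩
      · show (a :: labsTop s).Perm (l :: (a :: labsTop (chainRest s l)))
        exact (h4.cons a).trans (List.Perm.swap l a _)
      · show (a :: (labels c ++ labels s)).Perm
          (l :: (labels (chainChild s l) ++ (a :: (labels c ++ labels (chainRest s l)))))
        refine ((List.Perm.append_left (labels c) h5).cons a).trans ?_
        exact perm_shuffle a l (labels c) (labels (chainChild s l)) (labels (chainRest s l))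

def buildC : Nat → (Int → List Int) → List Int → Int → RT
  | 0, _, _, _ => .nil
  | _+1, _, [], _ => .nil
  | f+1, adj, l :: ls, v =>
      .node l (buildC f adj (PySem.Set.discard (adj l) v) l) (buildC f adj ls v)

lemma buildC_nil_ls : ∀ (f : Nat) (adj : Int → List Int) (v : Int), buildC f adj [] v = .nil := by
  intro f
  cases f <;> intros <;> rfl

lemma build_chain : ∀ (n : Nat) (adjS adj' : Int → List Int) (t : RT) (v : Int)
    (ls : List Int) (fuel : Nat),
    (labels t).length ≤ n → RepT adjS t v → (labels t).Nodup →
    (∀ x ∈ labels t, (adj' x).Perm (adjS x)) → ls.Perm (labsTop t) →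
    (labels t).length ≤ fuel →
    RepT adj' (buildC fuel adj' ls v) v ∧
    (labels (buildC fuel adj' ls v)).Perm (labels t) ∧
    labsTop (buildC fuel adj' ls v) = ls := by
  intro n
  induction n with
  | zero =>
    intro adjS adj' t v ls fuel hn hrep hnd hperm hls hfuel
    have ht : labels t = [] := List.length_eq_zero_iff.1 (Nat.le_zero.1 hn)
    cases t with
    | node a c s => simp [labels] at ht
    | nil =>
      have hls0 : ls = [] := by
        have := hls.length_eq
        simpa [labsTop, List.length_eq_zero_iff] using this
      subst hls0
      rw [buildC_nil_ls]
      exact ⟨trivial, List.Perm.refl _, rfl⟩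
  | succ m ih =>
    intro adjS adj' t v ls fuel hn hrep hnd hperm hls hfuel
    cases ls with
    | nil =>
      have ht : labsTop t = [] := (hls.symm).eq_nil
      cases t with
      | node a c s => simp [labsTop] at ht
      | nil =>
        rw [buildC_nil_ls]
        exact ⟨trivial, List.Perm.refl _, rfl⟩
    | cons l ls' =>
      have hlmem : l ∈ labsTop t := hls.subset (by simp)
      obtain ⟨hc1, hc2, hc3, hc4, hc5⟩ := chain_decomp adjS t v l hrep hlmem
      have hlt : l ∈ labels t := mem_labels_of_mem_labsTop hlmem
      have hpos : 0 < (labels t).length := List.length_pos_of_mem hlt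
      have hlenT : (labels t).length
          = 1 + (labels (chainChild t l)).length + (labels (chainRest t l)).length := by
        have := hc5.length_eq
        simp at this
        omega
      obtain ⟨f, rfl⟩ : ∃ f, fuel = f + 1 := ⟨fuel - 1, by omega⟩
      have hndP : (l :: (labels (chainChild t l) ++ labels (chainRest t l))).Nodup :=
        hc5.nodup_iff.1 hnd
      rw [List.nodup_cons, List.nodup_append] at hndP
      obtain ⟨hlni, hndc, hndr, hdisj⟩ := hndP
      have hmemc : ∀ x ∈ labels (chainChild t l), x ∈ labels t := by
        intro x hx
        exact hc5.mem_iff.2 (by simp [hx])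
      have hmemr : ∀ x ∈ labels (chainRest t l), x ∈ labels t := by
        intro x hx
        exact hc5.mem_iff.2 (by simp [hx])
      have hlschild : (PySem.Set.discard (adj' l) v).Perm (labsTop (chainChild t l)) := by
        have hp : (adj' l).Perm (adjS l) := hperm l hlt
        have hfil := hp.filter (fun y => !(y == v))
        rw [discard_eq_filter] at hc1
        rw [discard_eq_filter]
        exact hc1 ▸ hfil
      obtain ⟨hrc, hpc, htc⟩ := ih adjS adj' (chainChild t l) l
        (PySem.Set.discard (adj' l) v) f (by omega) hc2 hndc
        (fun x hx => hperm x (hmemc x hx)) hlschild (by omega)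
      have hls' : ls'.Perm (labsTop (chainRest t l)) := (hls.trans hc4).cons_inv
      obtain ⟨hrs, hps, hts⟩ := ih adjS adj' (chainRest t l) v ls' f (by omega) hc3 hndr
        (fun x hx => hperm x (hmemr x hx)) hls' (by omega)
      refine ⟨⟨htc.symm, hrc, hrs⟩, ?_, ?_⟩
      · show (l :: (labels (buildC f adj' (PySem.Set.discard (adj' l) v) l)
            ++ labels (buildC f adj' ls' v))).Perm (labels t)
        exact ((hpc.append hps).cons l).trans hc5.symm
      · show l :: labsTop (buildC f adj' ls' v) = l :: ls'
        rw [hts]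

-- ===== VERDICT (by name: the statement is the Claim_ definition above) =====
theorem kingdomDivision_spec : Claim_equal_kingdomDivision := by
  intro n roads hdom hpre
  unfold Spec_kingdomDivision
  obtain ⟨hwfb, hscan⟩ := hpre
  have hwf : ∀ r ∈ roads, r.length = 2 := by
    intro r hr
    have := List.all_eq_true.1 hwfb r hr
    simpa using this
  rw [portA_eq n roads hwf, portB_eq n roads hwf, root_eq]
  unfold pvScanOK at hscan
  cases hroot : pvRootOf roads with
  | none =>
    show PySem.Int.mod (2 * 0) (10 ^ 9 + 7) = 0
    decide
  | some rt =>
    rw [hroot] at hscan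
    rw [Bool.and_eq_true] at hscan
    obtain ⟨hok, hskipb⟩ := hscan
    have hskip : ∀ ab ∈ (pvScanN ((pvPairs roads).length + 1)
          ([rt], [], pvPairs roads, true)).2.2.1,
        ab.1 ∉ (pvScanN ((pvPairs roads).length + 1) ([rt], [], pvPairs roads, true)).1 ∧
        ab.2 ∉ (pvScanN ((pvPairs roads).length + 1) ([rt], [], pvPairs roads, true)).1 := by
      intro ab hab
      have h := List.all_eq_true.1 hskipb ab hab
      rw [Bool.and_eq_true] at h
      exact ⟨by simpa using h.1, by simpa using h.2⟩
    obtain ⟨hInvF, hpart⟩ := scanN_inv ((pvPairs roads).length + 1)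
      ([rt], [], pvPairs roads, true) (scanInv_init rt) hok
    have hpartP : ((pvScanN ((pvPairs roads).length + 1)
        ([rt], [], pvPairs roads, true)).2.1 ++
        (pvScanN ((pvPairs roads).length + 1) ([rt], [], pvPairs roads, true)).2.2.1).Perm
        (pvPairs roads) := by simpa using hpart
    obtain ⟨hndS, hlenS, hout, hadjnd, hself, hsubS, htrees⟩ := hInvF
    have hrtS : rt ∈ (pvScanN ((pvPairs roads).length + 1)
        ([rt], [], pvPairs roads, true)).1 :=
      scanN_S_sub _ ([rt], [], pvPairs roads, true) (by simp)
    obtain ⟨c, hrep, hperm⟩ := htrees rt hrtS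
    -- original-order adjacency is a pointwise permutation of the scan-order adjacency on S
    have hadjP : ∀ v ∈ (pvScanN ((pvPairs roads).length + 1)
        ([rt], [], pvPairs roads, true)).1,
        (adjOf (pvPairs roads) v).Perm
          (adjOf (pvScanN ((pvPairs roads).length + 1) ([rt], [], pvPairs roads, true)).2.1 v) := by
      intro v hv
      have h1 := adjOf_perm hpartP.symm v
      rw [adjOf_split] at h1
      rw [adjOf_nil_of_disjoint _ v (fun ab hab =>
        ⟨fun he => (hskip ab hab).1 (he ▸ hv), fun he => (hskip ab hab).2 (he ▸ hv)⟩)] at h1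
      rw [List.append_nil] at h1
      exact h1
    have hndT : (labels (RT.node rt c .nil)).Nodup := hperm.nodup_iff.2 hndS
    have hsubT : ∀ x ∈ labels (RT.node rt c .nil),
        x ∈ (pvScanN ((pvPairs roads).length + 1) ([rt], [], pvPairs roads, true)).1 :=
      fun x hx => hperm.mem_iff.1 hx
    -- build the tree matching the original-order adjacency
    have hbuild := build_chain (labels (RT.node rt c .nil)).length
      (adjOf (pvScanN ((pvPairs roads).length + 1) ([rt], [], pvPairs roads, true)).2.1)
      (adjOf (pvPairs roads)) (RT.node rt c .nil) rt [rt]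
      (labels (RT.node rt c .nil)).length le_rfl hrep hndT
      (fun x hx => hadjP x (hsubT x hx)) (by simp [labsTop]) le_rfl
    have hpos : 0 < (labels (RT.node rt c .nil)).length := by simp [labels]
    obtain ⟨f, hfeq⟩ : ∃ f, (labels (RT.node rt c .nil)).length = f + 1 :=
      ⟨(labels (RT.node rt c .nil)).length - 1, by omega⟩
    rw [hfeq] at hbuild
    have ht2eq : buildC (f+1) (adjOf (pvPairs roads)) [rt] rt =
        RT.node rt (buildC f (adjOf (pvPairs roads))
          (PySem.Set.discard (adjOf (pvPairs roads) rt) rt) rt) RT.nil := by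
      show RT.node rt _ (buildC f (adjOf (pvPairs roads)) [] rt) = _
      rw [buildC_nil_ls]
    rw [ht2eq] at hbuild
    obtain ⟨hrep2, hperm2, htop2⟩ := hbuild
    set c2 := buildC f (adjOf (pvPairs roads))
      (PySem.Set.discard (adjOf (pvPairs roads) rt) rt) rt with hc2
    have hnd2 : (labels (RT.node rt c2 RT.nil)).Nodup := hperm2.nodup_iff.2 hndT
    have hnd2' := hnd2
    rw [show labels (RT.node rt c2 RT.nil) = rt :: (labels c2 ++ []) from rfl, List.append_nil,
      List.nodup_cons] at hnd2'
    obtain ⟨hrtc2, hndc2⟩ := hnd2'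
    -- rt has no self-loop in the original adjacency
    have hrtself : rt ∉ adjOf (pvPairs roads) rt :=
      fun hm => hself rt ((hadjP rt hrtS).mem_iff.1 hm)
    have hadj'rt : adjOf (pvPairs roads) rt = labsTop c2 := by
      have h1 := hrep2.1
      rwa [discard_of_not_mem hrtself] at h1
    -- dict contents on the component
    have hdictA : ∀ v ∈ labels (RT.node rt c2 RT.nil),
        ((pvPairs roads).foldl adjStepA PySem.Dict.empty).getD v PySem.Set.empty
          = adjOf (pvPairs roads) v := by
      intro v hv
      have hvS : v ∈ (pvScanN ((pvPairs roads).length + 1)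
          ([rt], [], pvPairs roads, true)).1 := hsubT v (hperm2.mem_iff.1 hv)
      have hnodup : (adjOf (pvPairs roads) v).Nodup := (hadjP v hvS).nodup_iff.2 (hadjnd v)
      rw [getD_foldA, PySem.Dict.getD_empty,
        foldl_add_eq_append _ _ hnodup (by intro a _; simp [PySem.Set.empty])]
      simp [PySem.Set.empty]
    have hdictB : ∀ v,
        ((pvPairs roads).foldl adjStepB PySem.Dict.empty).getD v []
          = adjOf (pvPairs roads) v := by
      intro v
      rw [getD_foldB, PySem.Dict.getD_empty]
      rfl
    -- sizes
    have hlc2 : (labels c2).length ≤ roads.length := by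
      have h1 : (labels (RT.node rt c2 RT.nil)).length
          = (pvScanN ((pvPairs roads).length + 1) ([rt], [], pvPairs roads, true)).1.length :=
        (hperm2.trans hperm).length_eq
      have h2 : (labels (RT.node rt c2 RT.nil)).length = (labels c2).length + 1 := by
        simp [labels]
      have h3 : (pvScanN ((pvPairs roads).length + 1)
          ([rt], [], pvPairs roads, true)).2.1.length ≤ (pvPairs roads).length := by
        have := hpartP.length_eq
        simp at this
        omega
      have h4 : (pvPairs roads).length ≤ roads.length := List.length_filterMap_le _ _
      omega
    -- A-side run
    have hinvA : InvL ((pvPairs roads).foldl adjStepA PySem.Dict.empty) c2 rt :=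
      rep_to_invL hrep2.2.1 (fun x hx => hdictA x (by simp [labels, hx]))
    have hArt : ((pvPairs roads).foldl adjStepA PySem.Dict.empty).getD rt PySem.Set.empty
        = labsTop c2 := by
      rw [hdictA rt (by simp [labels]), hadj'rt]
    obtain ⟨-, hrunA⟩ := (runOK_of_chain c2 (chainOK_all c2)) rt
      ((pvPairs roads).foldl adjStepA PySem.Dict.empty) (2 * roads.length + 4) hnd2 hArt hinvA
    obtain ⟨e', hA, -⟩ := hrunA (by omega)
    -- B-side run
    have hBrun : solveB (roads.length + 2) ((pvPairs roads).foldl adjStepB PySem.Dict.empty) rt rt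
        = (v0 c2, v1 c2) := by
      refine bok_all c2 rt rt _ _ ?_ ?_ (by omega)
      · rw [hdictB rt]
        exact hrep2.1
      · exact repT_congr hrep2.2.1 (fun x hx => hdictB x)
    show PySem.Int.mod (2 * (dfsA (2 * roads.length + 4)
        ((pvPairs roads).foldl adjStepA PySem.Dict.empty) rt false).1) (10 ^ 9 + 7)
      = PySem.Int.mod (2 * (solveB (roads.length + 2)
        ((pvPairs roads).foldl adjStepB PySem.Dict.empty) rt rt).1) (10 ^ 9 + 7)
    rw [hA, hBrun]
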